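-- pv_equiv track=rewrite | github.com/valmir-filho/python | codewars/files-400-to-499/challenge418.py | validate_battlefield
-- ===== SOURCE A (Python) =====
-- def validate_battlefield(field):
--     n = 10
--
--     # Quick sanity: must be 10x10 of 0/1.
--     if len(field) != n or any(len(row) != n for row in field):
--         return False
--     for row in field:
--         for v in row:
--             if v not in (0, 1):
--                 return False
--
--     visited = [[False] * n for _ in range(n)]
--     ships = []
--
--     def neighbors8(r, c):
--         for dr in (-1, 0, 1):
--             for dc in (-1, 0, 1):
--                 if dr == 0 and dc == 0:
--                     continue
--                 rr, cc = r + dr, c + dc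
--                 if 0 <= rr < n and 0 <= cc < n:
--                     yield rr, cc
--
--     def is_ship_cell(r, c):
--         return field[r][c] == 1
--
--     for r in range(n):
--         for c in range(n):
--             if not is_ship_cell(r, c) or visited[r][c]:
--                 continue
--
--             # If this cell has diagonal contact with ANY ship cell, invalid (diagonal adjacency between different ships is forbidden; within a straight ship it also must never happen anyway, so it's always illegal.).
--             for rr, cc in ((r-1, c-1), (r-1, c+1), (r+1, c-1), (r+1, c+1)):
--                 if 0 <= rr < n and 0 <= cc < n and is_ship_cell(rr, cc):
--                     return False
--
--             # Determine orientation (if any): horizontal or vertical or single.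
--             right = (c + 1 < n and is_ship_cell(r, c + 1))
--             down = (r + 1 < n and is_ship_cell(r + 1, c))
--
--             # Can't branch (an L / T shape).
--             if right and down:
--                 return False
--
--             cells = []
--
--             if right:
--                 # Walk horizontally.
--                 cc = c
--                 while cc < n and is_ship_cell(r, cc):
--                     # Vertical neighbor would make a bend/thickness -> invalid.
--                     if (r - 1 >= 0 and is_ship_cell(r - 1, cc)) or (r + 1 < n and is_ship_cell(r + 1, cc)):
--                         return False
--                     cells.append((r, cc))
--                     cc += 1
--             elif down:
--                 # Walk vertically.
--                 rr = r
--                 while rr < n and is_ship_cell(rr, c):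
--                     # Horizontal neighbor would make a bend/thickness -> invalid.
--                     if (c - 1 >= 0 and is_ship_cell(rr, c - 1)) or (c + 1 < n and is_ship_cell(rr, c + 1)):
--                         return False
--                     cells.append((rr, c))
--                     rr += 1
--             else:
--                 # Single cell ship (submarine candidate).
--                 cells = [(r, c)]
--
--             # Mark visited and ensure no edge/corner contact with other ships outside this ship.
--             ship_set = set(cells)
--             for rr, cc in cells:
--                 if visited[rr][cc]:
--                     return False
--                 visited[rr][cc] = True
--
--             for rr, cc in cells:
--                 for ar, ac in neighbors8(rr, cc):
--                     if is_ship_cell(ar, ac) and (ar, ac) not in ship_set: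
--                         # Touching another ship by edge or corner.
--                         return False
--
--             ships.append(len(cells))
--
--     # Must match fleet: 1x4, 2x3, 3x2, 4x1.
--     required = {4: 1, 3: 2, 2: 3, 1: 4}
--     counts = {1: 0, 2: 0, 3: 0, 4: 0}
--
--     for size in ships:
--         if size not in counts:
--             return False
--         counts[size] += 1
--
--     return counts == required
-- ===== SOURCE B (Python) =====
-- def validate_battlefield(field):
--     n = 10
--
--     # Quick sanity: must be 10x10 of 0/1.
--     if len(field) != n or any(len(row) != n for row in field):
--         return False
--     for row in field:
--         for v in row:
--             if v not in (0, 1):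
--                 return False
--
--     def at(r, c):
--         return 0 <= r < n and 0 <= c < n and field[r][c] == 1
--
--     sizes = []
--     for r in range(n):
--         for c in range(n):
--             if not at(r, c):
--                 continue
--             # Any diagonal contact is illegal; checking the two downward
--             # diagonals at every ship cell covers every diagonal pair once.
--             if at(r + 1, c + 1) or at(r + 1, c - 1):
--                 return False
--             # A cell with both a horizontal and a vertical ship neighbour
--             # is a bend, branch or thickness -> illegal.
--             if (at(r, c - 1) or at(r, c + 1)) and (at(r - 1, c) or at(r + 1, c)):
--                 return False
--             # Record each maximal straight run once, at its first cell.
--             if at(r, c + 1) and not at(r, c - 1):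
--                 k = 0
--                 while at(r, c + k):
--                     k += 1
--                 sizes.append(k)
--             elif at(r + 1, c) and not at(r - 1, c):
--                 k = 0
--                 while at(r + k, c):
--                     k += 1
--                 sizes.append(k)
--             elif not (at(r, c - 1) or at(r, c + 1) or at(r - 1, c) or at(r + 1, c)):
--                 sizes.append(1)
--
--     # Fleet must be exactly 1x4, 2x3, 3x2, 4x1.
--     return (len(sizes) == 10 and sizes.count(1) == 4 and sizes.count(2) == 3
--             and sizes.count(3) == 2 and sizes.count(4) == 1)
-- ===== Notes on version B (the rewrite author's own statement) =====
-- stated objective: simpler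
-- what changed: A walks each ship component with a visited matrix, an orientation-dependent walk, a per-component 8-neighbourhood exclusion scan and a dict tally; B is a stateless row-major pass that rejects on two purely local conditions per ship cell (downward diagonal contact; a cell with both a horizontal and a vertical ship neighbour), records each maximal straight run once at its first cell, and compares the size tally by counts.
import Mathlib
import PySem

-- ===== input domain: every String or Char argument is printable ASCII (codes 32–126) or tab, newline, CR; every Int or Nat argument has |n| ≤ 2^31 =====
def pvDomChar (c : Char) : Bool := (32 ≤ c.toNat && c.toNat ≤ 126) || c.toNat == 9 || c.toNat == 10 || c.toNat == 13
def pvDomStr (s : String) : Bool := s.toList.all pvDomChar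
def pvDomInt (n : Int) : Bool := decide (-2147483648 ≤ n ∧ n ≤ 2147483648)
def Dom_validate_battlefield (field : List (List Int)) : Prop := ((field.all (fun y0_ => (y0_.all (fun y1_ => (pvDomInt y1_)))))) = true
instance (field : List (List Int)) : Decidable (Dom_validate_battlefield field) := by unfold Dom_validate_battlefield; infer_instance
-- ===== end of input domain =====

-- B replaces A's visited-matrix component walker by a stateless scan that checks purely local
-- shape conditions per cell and tallies maximal straight runs at their first cell (objective: simpler).


-- ===== PORT A =====
-- is_ship_cell: field[r][c] == 1 (indices are guarded in range at every call site, as in the Python)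
def aShip (field : List (List Int)) (r c : Int) : Bool :=
  ((PySem.List.pyGet? field r).bind (fun row => PySem.List.pyGet? row c)) == some 1

-- the loop over the four diagonal corners at a component's first cell
def aDiagHit (field : List (List Int)) (r c : Int) : Bool :=
  ([(r-1,c-1),(r-1,c+1),(r+1,c-1),(r+1,c+1)] : List (Int × Int)).any
    (fun q => decide (0 ≤ q.1) && decide (q.1 < 10) && decide (0 ≤ q.2) && decide (q.2 < 10) && aShip field q.1 q.2)

-- generator neighbors8(r, c): the in-range 8-neighbourhood
def aNeighbors8 (r c : Int) : List (Int × Int) :=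
  ([(-1,-1),(-1,0),(-1,1),(0,-1),(0,1),(1,-1),(1,0),(1,1)] : List (Int × Int)).filterMap
    (fun d => if 0 ≤ r + d.1 ∧ r + d.1 < 10 ∧ 0 ≤ c + d.2 ∧ c + d.2 < 10 then some (r + d.1, c + d.2) else none)

-- `while cc < n and is_ship_cell(r, cc)` horizontal walk; none = early `return False`.
-- Fuel 11 never binds: cc starts at c ≥ 0 and the cc < 10 test stops the loop within 10 steps.
def aWalkH (field : List (List Int)) (r : Int) : Int → Nat → Option (List (Int × Int))
  | _, 0 => some []
  | cc, fuel + 1 =>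
    if decide (cc < 10) && aShip field r cc then
      if (decide (0 ≤ r - 1) && aShip field (r-1) cc) || (decide (r + 1 < 10) && aShip field (r+1) cc) then none
      else match aWalkH field r (cc+1) fuel with
        | none => none
        | some rest => some ((r, cc) :: rest)
    else some []

-- the vertical walk
def aWalkV (field : List (List Int)) (c : Int) : Int → Nat → Option (List (Int × Int))
  | _, 0 => some []
  | rr, fuel + 1 =>
    if decide (rr < 10) && aShip field rr c then
      if (decide (0 ≤ c - 1) && aShip field rr (c-1)) || (decide (c + 1 < 10) && aShip field rr (c+1)) then none
      else match aWalkV field c (rr+1) fuel with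
        | none => none
        | some rest => some ((rr, c) :: rest)
    else some []

-- `for rr, cc in cells: if visited[rr][cc]: return False; visited[rr][cc] = True`
-- (visited is kept as the list of marked cells rather than a 10x10 bool matrix)
def aMark (visited : List (Int × Int)) : List (Int × Int) → Option (List (Int × Int))
  | [] => some visited
  | p :: ps => if visited.contains p then none else aMark (visited ++ [p]) ps

-- the nested `for r in range(n): for c in range(n)` loop, with early `return False` as none;
-- returns the final visited set together with the ships list.  `right`/`down` are written out
-- at each use site, and the two early-return matches are Option.bind (none propagates).
def aScan (field : List (List Int)) : List (Int × Int) → List (Int × Int) → List Int → Option (List (Int × Int) × List Int)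
  | [], visited, ships => some (visited, ships)
  | (r, c) :: rest, visited, ships =>
    if !aShip field r c || visited.contains (r, c) then aScan field rest visited ships
    else if aDiagHit field r c then none
    else if (decide (c + 1 < 10) && aShip field r (c+1)) && (decide (r + 1 < 10) && aShip field (r+1) c) then none
    else
      (if decide (c + 1 < 10) && aShip field r (c+1) then aWalkH field r c 11
       else if decide (r + 1 < 10) && aShip field (r+1) c then aWalkV field c r 11
       else some [(r, c)]).bind (fun cells =>
        (aMark visited cells).bind (fun visited' =>
          if cells.any (fun p => (aNeighbors8 p.1 p.2).any (fun q => aShip field q.1 q.2 && !cells.contains q)) then none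
          else aScan field rest visited' (ships ++ [(cells.length : Int)])))

-- `for size in ships: if size not in counts: return False; counts[size] += 1`
def aCounts : PySem.Dict Int Int → List Int → Option (PySem.Dict Int Int)
  | counts, [] => some counts
  | counts, size :: rest =>
    match counts.get? size with
    | none => none
    | some k => aCounts (counts.insert size (k+1)) rest

-- Python's `==` on dicts: same size and every key-value pair of the left occurs in the right
-- (order-insensitive; ported by hand, exact for dicts)
def aDictEq (d e : PySem.Dict Int Int) : Bool :=
  d.items.length == e.items.length && d.items.all (fun kv => e.get? kv.1 == some kv.2)

def validate_battlefield (field : List (List Int)) : Bool :=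
  if field.length != 10 || field.any (fun row => row.length != 10) then false
  else if field.any (fun row => row.any (fun v => !(v == 0 || v == 1))) then false
  else
    match aScan field ((PySem.List.pyRange 0 10 1).flatMap (fun r => (PySem.List.pyRange 0 10 1).map (fun c => (r, c)))) [] [] with
    | none => false
    | some (_, ships) =>
      match aCounts (((((PySem.Dict.empty).insert 1 0).insert 2 0).insert 3 0).insert 4 0) ships with
      | none => false
      | some counts =>
        aDictEq counts (((((PySem.Dict.empty).insert 4 1).insert 3 2).insert 2 3).insert 1 4)

-- ===== PORT B =====
-- at(r, c): bounds test then field[r][c] == 1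
def bAt (field : List (List Int)) (r c : Int) : Bool :=
  decide (0 ≤ r) && decide (r < 10) && decide (0 ≤ c) && decide (c < 10) &&
    (((PySem.List.pyGet? field r).bind (fun row => PySem.List.pyGet? row c)) == some 1)

-- `k = 0; while at(r, c + k): k += 1` (fuel 11 never binds: the bounds test in at stops it)
def bRunH (field : List (List Int)) (r : Int) : Int → Nat → Nat
  | _, 0 => 0
  | c, fuel + 1 => if bAt field r c then bRunH field r (c+1) fuel + 1 else 0

def bRunV (field : List (List Int)) (c : Int) : Int → Nat → Nat
  | _, 0 => 0
  | r, fuel + 1 => if bAt field r c then bRunV field c (r+1) fuel + 1 else 0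

-- the nested for loop of B: purely local checks, run lengths recorded at run starts
def bScan (field : List (List Int)) : List (Int × Int) → List Int → Option (List Int)
  | [], sizes => some sizes
  | (r, c) :: rest, sizes =>
    if !bAt field r c then bScan field rest sizes
    else if bAt field (r+1) (c+1) || bAt field (r+1) (c-1) then none
    else if (bAt field r (c-1) || bAt field r (c+1)) && (bAt field (r-1) c || bAt field (r+1) c) then none
    else if bAt field r (c+1) && !bAt field r (c-1) then bScan field rest (sizes ++ [(bRunH field r c 11 : Int)])
    else if bAt field (r+1) c && !bAt field (r-1) c then bScan field rest (sizes ++ [(bRunV field c r 11 : Int)])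
    else if !(bAt field r (c-1) || bAt field r (c+1) || bAt field (r-1) c || bAt field (r+1) c) then bScan field rest (sizes ++ [(1 : Int)])
    else bScan field rest sizes

def validate_battlefield_alt (field : List (List Int)) : Bool :=
  if field.length != 10 || field.any (fun row => row.length != 10) then false
  else if field.any (fun row => row.any (fun v => !(v == 0 || v == 1))) then false
  else
    match bScan field ((PySem.List.pyRange 0 10 1).flatMap (fun r => (PySem.List.pyRange 0 10 1).map (fun c => (r, c)))) [] with
    | none => false
    | some sizes =>
      sizes.length == 10 && sizes.count 1 == 4 && sizes.count 2 == 3 && sizes.count 3 == 2 && sizes.count 4 == 1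

-- ===== PRECONDITION & SPEC =====
def Spec_validate_battlefield (field : List (List Int)) (out : Bool) : Prop := out = validate_battlefield_alt field
instance (field : List (List Int)) (out : Bool) : Decidable (Spec_validate_battlefield field out) := by unfold Spec_validate_battlefield; infer_instance

-- ===== CLAIM (what is proved, stated in full; the proofs are below) =====
def Claim_equal_validate_battlefield : Prop := ∀ (field : List (List Int)), Dom_validate_battlefield field → Spec_validate_battlefield field (validate_battlefield field)

-- ===== LEMMAS AND PROOFS =====

-- the row-major cell list both scans run over
def cellsL : List (Int × Int) := (PySem.List.pyRange 0 10 1).flatMap (fun r => (PySem.List.pyRange 0 10 1).map (fun c => (r, c)))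

lemma mem_cellsL (p : Int × Int) : p ∈ cellsL ↔ 0 ≤ p.1 ∧ p.1 < 10 ∧ 0 ≤ p.2 ∧ p.2 < 10 := by
  obtain ⟨r, c⟩ := p
  simp only [cellsL, List.mem_flatMap, List.mem_map, PySem.List.mem_pyRange_one]
  constructor
  · rintro ⟨a, ha, b, hb, h⟩
    rw [Prod.mk.injEq] at h
    obtain ⟨rfl, rfl⟩ := h
    exact ⟨ha.1, ha.2, hb.1, hb.2⟩
  · rintro ⟨h1, h2, h3, h4⟩
    exact ⟨r, ⟨h1, h2⟩, c, ⟨h3, h4⟩, rfl⟩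

lemma cellsL_pairwise : cellsL.Pairwise (fun p q => p.1 < q.1 ∨ (p.1 = q.1 ∧ p.2 < q.2)) := by
  decide

lemma cellsL_nodup : cellsL.Nodup := by
  refine cellsL_pairwise.imp ?_
  rintro ⟨a, b⟩ ⟨x, y⟩ h heq
  rw [Prod.mk.injEq] at heq
  obtain ⟨rfl, rfl⟩ := heq
  simp only at h
  omega

-- the local good-shape condition at a cell: no downward diagonal contact, no bend/branch/thickness
def CellOK (f : List (List Int)) (r c : Int) : Prop :=
  bAt f (r+1) (c+1) = false ∧ bAt f (r+1) (c-1) = false ∧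
  ((bAt f r (c-1) || bAt f r (c+1)) && (bAt f (r-1) c || bAt f (r+1) c)) = false

def Good (f : List (List Int)) : Prop := ∀ r c : Int, bAt f r c = true → CellOK f r c

lemma bAt_bounds {f : List (List Int)} {r c : Int} (h : bAt f r c = true) :
    0 ≤ r ∧ r < 10 ∧ 0 ≤ c ∧ c < 10 ∧ aShip f r c = true := by
  simp [bAt, aShip] at h ⊢; tauto

lemma aShip_eq_bAt {f : List (List Int)} {r c : Int} (h0 : 0 ≤ r) (h1 : r < 10) (h2 : 0 ≤ c) (h3 : c < 10) :
    aShip f r c = bAt f r c := by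
  simp [bAt, aShip, h0, h1, h2, h3]

lemma bAt_false_top {f : List (List Int)} {r c : Int} (h : r < 0 ∨ 10 ≤ r ∨ c < 0 ∨ 10 ≤ c) : bAt f r c = false := by
  rcases h with h | h | h | h
  · simp [bAt, show ¬(0 ≤ r) by omega]
  · simp [bAt, show ¬(r < 10) by omega]
  · simp [bAt, show ¬(0 ≤ c) by omega]
  · simp [bAt, show ¬(c < 10) by omega]

-- bAt is exactly the range-guarded aShip
lemma aShip_guard_eq {f : List (List Int)} {r c : Int} :
    (decide (0 ≤ r) && decide (r < 10) && decide (0 ≤ c) && decide (c < 10) && aShip f r c) = bAt f r c := rfl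

lemma cond_col {f : List (List Int)} {r c : Int} (h0 : 0 ≤ r) (h1 : r < 10) (h2 : 0 ≤ c) :
    (decide (c < 10) && aShip f r c) = bAt f r c := by
  rw [← aShip_guard_eq]; simp [h0, h1, h2]

lemma cond_rowlow {f : List (List Int)} {r c : Int} (h1 : r - 1 < 10) (h2 : 0 ≤ c) (h3 : c < 10) :
    (decide (0 ≤ r - 1) && aShip f (r-1) c) = bAt f (r-1) c := by
  rw [← aShip_guard_eq]; simp [h1, h2, h3]

lemma cond_rowhigh {f : List (List Int)} {r c : Int} (h0 : 0 ≤ r + 1) (h2 : 0 ≤ c) (h3 : c < 10) :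
    (decide (r + 1 < 10) && aShip f (r+1) c) = bAt f (r+1) c := by
  rw [← aShip_guard_eq]; simp [h0, h2, h3]

lemma cond_collow {f : List (List Int)} {r c : Int} (h0 : 0 ≤ r) (h1 : r < 10) (h3 : c - 1 < 10) :
    (decide (0 ≤ c - 1) && aShip f r (c-1)) = bAt f r (c-1) := by
  rw [← aShip_guard_eq]; simp [h0, h1, h3]

lemma cond_colhigh {f : List (List Int)} {r c : Int} (h0 : 0 ≤ r) (h1 : r < 10) (h2 : 0 ≤ c + 1) :
    (decide (c + 1 < 10) && aShip f r (c+1)) = bAt f r (c+1) := by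
  rw [← aShip_guard_eq]; simp [h0, h1, h2]

lemma bRunH_spec {f : List (List Int)} {r : Int} :
    ∀ (fuel : Nat) (c : Int), 0 ≤ c → (10:Int) - c < fuel →
      (∀ i : Nat, i < bRunH f r c fuel → bAt f r (c + (i:Int)) = true) ∧
      bAt f r (c + (bRunH f r c fuel : Int)) = false := by
  intro fuel
  induction fuel with
  | zero =>
    intro c hc hf
    refine ⟨fun i hi => absurd hi (by simp [bRunH]), ?_⟩
    have : bRunH f r c 0 = 0 := rfl
    rw [this]
    exact bAt_false_top (by omega)
  | succ fuel ih =>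
    intro c hc hf
    by_cases hb : bAt f r c = true
    · have heq : bRunH f r c (fuel+1) = bRunH f r (c+1) fuel + 1 := by simp [bRunH, hb]
      have ih' := ih (c+1) (by omega) (by omega)
      constructor
      · intro i hi
        rw [heq] at hi
        cases i with
        | zero => simpa using hb
        | succ j =>
          have := ih'.1 j (by omega)
          have harr : c + ((j:Int) + 1) = (c + 1) + (j:Int) := by ring
          rw [show ((j + 1 : Nat) : Int) = (j:Int) + 1 by push_cast; ring, harr]
          exact this
      · rw [heq]
        have := ih'.2
        have harr : c + ((bRunH f r (c+1) fuel + 1 : Nat) : Int) = (c + 1) + ((bRunH f r (c+1) fuel : Nat) : Int) := by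
          push_cast; ring
        rw [harr]
        exact this
    · have heq : bRunH f r c (fuel+1) = 0 := by simp [bRunH, hb]
      refine ⟨fun i hi => absurd hi (by omega), ?_⟩
      rw [heq]
      simpa using (Bool.not_eq_true _).mp hb

lemma bRunH_ge {f : List (List Int)} {r : Int} {fuel : Nat} {c : Int} (hc : 0 ≤ c) (hf : (10:Int) - c < fuel)
    {m : Nat} (h : ∀ i : Nat, i < m → bAt f r (c + (i:Int)) = true) : m ≤ bRunH f r c fuel := by
  by_contra hlt
  push Not at hlt
  have h2 := (bRunH_spec (f := f) (r := r) fuel c hc hf).2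
  rw [h _ hlt] at h2
  exact absurd h2 (by simp)

lemma bRunV_spec {f : List (List Int)} {c : Int} :
    ∀ (fuel : Nat) (r : Int), 0 ≤ r → (10:Int) - r < fuel →
      (∀ i : Nat, i < bRunV f c r fuel → bAt f (r + (i:Int)) c = true) ∧
      bAt f (r + (bRunV f c r fuel : Int)) c = false := by
  intro fuel
  induction fuel with
  | zero =>
    intro r hr hf
    refine ⟨fun i hi => absurd hi (by simp [bRunV]), ?_⟩
    have : bRunV f c r 0 = 0 := rfl
    rw [this]
    exact bAt_false_top (by omega)
  | succ fuel ih =>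
    intro r hr hf
    by_cases hb : bAt f r c = true
    · have heq : bRunV f c r (fuel+1) = bRunV f c (r+1) fuel + 1 := by simp [bRunV, hb]
      have ih' := ih (r+1) (by omega) (by omega)
      constructor
      · intro i hi
        rw [heq] at hi
        cases i with
        | zero => simpa using hb
        | succ j =>
          have := ih'.1 j (by omega)
          have harr : r + ((j:Int) + 1) = (r + 1) + (j:Int) := by ring
          rw [show ((j + 1 : Nat) : Int) = (j:Int) + 1 by push_cast; ring, harr]
          exact this
      · rw [heq]
        have := ih'.2
        have harr : r + ((bRunV f c (r+1) fuel + 1 : Nat) : Int) = (r + 1) + ((bRunV f c (r+1) fuel : Nat) : Int) := by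
          push_cast; ring
        rw [harr]
        exact this
    · have heq : bRunV f c r (fuel+1) = 0 := by simp [bRunV, hb]
      refine ⟨fun i hi => absurd hi (by omega), ?_⟩
      rw [heq]
      simpa using (Bool.not_eq_true _).mp hb

lemma bRunV_ge {f : List (List Int)} {c : Int} {fuel : Nat} {r : Int} (hr : 0 ≤ r) (hf : (10:Int) - r < fuel)
    {m : Nat} (h : ∀ i : Nat, i < m → bAt f (r + (i:Int)) c = true) : m ≤ bRunV f c r fuel := by
  by_contra hlt
  push Not at hlt
  have h2 := (bRunV_spec (f := f) (c := c) fuel r hr hf).2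
  rw [h _ hlt] at h2
  exact absurd h2 (by simp)

lemma aWalkH_shape {f : List (List Int)} {r : Int} (h0 : 0 ≤ r) (h1 : r < 10) :
    ∀ (fuel : Nat) (cc : Int) (cells : List (Int × Int)), 0 ≤ cc → (10:Int) - cc < fuel →
      aWalkH f r cc fuel = some cells →
      cells = (List.range (bRunH f r cc fuel)).map (fun (i : Nat) => ((r : Int), cc + (i : Int))) ∧
      ∀ i : Nat, i < bRunH f r cc fuel → bAt f (r-1) (cc + (i:Int)) = false ∧ bAt f (r+1) (cc + (i:Int)) = false := by
  intro fuel
  induction fuel with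
  | zero =>
    intro cc cells hcc hf hw
    have : cells = [] := by simpa [aWalkH] using hw.symm
    subst this
    exact ⟨by simp [bRunH], fun i hi => absurd hi (by simp [bRunH])⟩
  | succ fuel ih =>
    intro cc cells hcc hf hw
    rw [show aWalkH f r cc (fuel+1) =
        (if decide (cc < 10) && aShip f r cc then
          if (decide (0 ≤ r - 1) && aShip f (r-1) cc) || (decide (r + 1 < 10) && aShip f (r+1) cc) then none
          else match aWalkH f r (cc+1) fuel with
            | none => none
            | some rest => some ((r, cc) :: rest)
        else some []) from rfl] at hw
    rw [cond_col h0 h1 hcc] at hw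
    by_cases hb : bAt f r cc = true
    · have hcc10 : cc < 10 := (bAt_bounds hb).2.2.2.1
      rw [cond_rowlow (by omega) hcc hcc10, cond_rowhigh (by omega) hcc hcc10] at hw
      rw [if_pos hb] at hw
      by_cases hvert : (bAt f (r-1) cc || bAt f (r+1) cc) = true
      · rw [if_pos hvert] at hw; exact absurd hw (by simp)
      · rw [if_neg hvert] at hw
        rcases hrest : aWalkH f r (cc+1) fuel with _ | rest
        · rw [hrest] at hw; exact absurd hw (by simp)
        · rw [hrest] at hw
          simp only [Option.some.injEq] at hw
          obtain ⟨hsh, hvt⟩ := ih (cc+1) rest (by omega) (by omega) hrest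
          have hK : bRunH f r cc (fuel+1) = bRunH f r (cc+1) fuel + 1 := by simp [bRunH, hb]
          constructor
          · rw [← hw, hsh, hK, List.range_succ_eq_map, List.map_cons, List.map_map]
            congr 1
            · simp
            · apply List.map_congr_left
              intro i _
              simp only [Function.comp]
              congr 1
              push_cast; ring
          · intro i hi
            rw [hK] at hi
            cases i with
            | zero =>
              simp only [Nat.cast_zero, add_zero]
              simp only [Bool.or_eq_true, not_or] at hvert
              exact ⟨(Bool.not_eq_true _).mp hvert.1, (Bool.not_eq_true _).mp hvert.2⟩
            | succ j =>
              have := hvt j (by omega)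
              have harr : cc + ((j:Int) + 1) = (cc + 1) + (j:Int) := by ring
              rw [show ((j + 1 : Nat) : Int) = (j:Int) + 1 by push_cast; ring, harr]
              exact this
    · rw [if_neg hb] at hw
      simp only [Option.some.injEq] at hw
      have hK : bRunH f r cc (fuel+1) = 0 := by simp [bRunH, hb]
      exact ⟨by rw [← hw, hK]; simp, fun i hi => absurd hi (by omega)⟩

lemma aWalkH_run {f : List (List Int)} {r : Int} (h0 : 0 ≤ r) (h1 : r < 10) :
    ∀ (fuel : Nat) (cc : Int), 0 ≤ cc → (10:Int) - cc < fuel →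
      (∀ i : Nat, i < bRunH f r cc fuel → bAt f (r-1) (cc + (i:Int)) = false ∧ bAt f (r+1) (cc + (i:Int)) = false) →
      aWalkH f r cc fuel = some ((List.range (bRunH f r cc fuel)).map (fun (i : Nat) => ((r : Int), cc + (i : Int)))) := by
  intro fuel
  induction fuel with
  | zero =>
    intro cc hcc hf _
    simp [aWalkH, bRunH]
  | succ fuel ih =>
    intro cc hcc hf hvt
    rw [show aWalkH f r cc (fuel+1) =
        (if decide (cc < 10) && aShip f r cc then
          if (decide (0 ≤ r - 1) && aShip f (r-1) cc) || (decide (r + 1 < 10) && aShip f (r+1) cc) then none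
          else match aWalkH f r (cc+1) fuel with
            | none => none
            | some rest => some ((r, cc) :: rest)
        else some []) from rfl]
    rw [cond_col h0 h1 hcc]
    by_cases hb : bAt f r cc = true
    · have hcc10 : cc < 10 := (bAt_bounds hb).2.2.2.1
      rw [cond_rowlow (by omega) hcc hcc10, cond_rowhigh (by omega) hcc hcc10]
      rw [if_pos hb]
      have hK : bRunH f r cc (fuel+1) = bRunH f r (cc+1) fuel + 1 := by simp [bRunH, hb]
      have h00 := hvt 0 (by omega)
      simp only [Nat.cast_zero, add_zero] at h00
      rw [if_neg (by simp [h00.1, h00.2])]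
      have hvt' : ∀ i : Nat, i < bRunH f r (cc+1) fuel → bAt f (r-1) ((cc+1) + (i:Int)) = false ∧ bAt f (r+1) ((cc+1) + (i:Int)) = false := by
        intro i hi
        have := hvt (i+1) (by omega)
        have harr : cc + ((i + 1 : Nat) : Int) = (cc + 1) + (i:Int) := by push_cast; ring
        rw [harr] at this
        exact this
      rw [ih (cc+1) (by omega) (by omega) hvt']
      simp only [Option.some.injEq]
      rw [hK, List.range_succ_eq_map, List.map_cons, List.map_map]
      congr 1
      · simp
      · apply List.map_congr_left
        intro i _
        simp only [Function.comp]
        congr 1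
        push_cast; ring
    · rw [if_neg hb]
      have hK : bRunH f r cc (fuel+1) = 0 := by simp [bRunH, hb]
      rw [hK]; simp

lemma aWalkV_shape {f : List (List Int)} {c : Int} (h0 : 0 ≤ c) (h1 : c < 10) :
    ∀ (fuel : Nat) (rr : Int) (cells : List (Int × Int)), 0 ≤ rr → (10:Int) - rr < fuel →
      aWalkV f c rr fuel = some cells →
      cells = (List.range (bRunV f c rr fuel)).map (fun (i : Nat) => (rr + (i : Int), (c : Int))) ∧
      ∀ i : Nat, i < bRunV f c rr fuel → bAt f (rr + (i:Int)) (c-1) = false ∧ bAt f (rr + (i:Int)) (c+1) = false := by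
  intro fuel
  induction fuel with
  | zero =>
    intro rr cells hrr hf hw
    have : cells = [] := by simpa [aWalkV] using hw.symm
    subst this
    exact ⟨by simp [bRunV], fun i hi => absurd hi (by simp [bRunV])⟩
  | succ fuel ih =>
    intro rr cells hrr hf hw
    rw [show aWalkV f c rr (fuel+1) =
        (if decide (rr < 10) && aShip f rr c then
          if (decide (0 ≤ c - 1) && aShip f rr (c-1)) || (decide (c + 1 < 10) && aShip f rr (c+1)) then none
          else match aWalkV f c (rr+1) fuel with
            | none => none
            | some rest => some ((rr, c) :: rest)
        else some []) from rfl] at hw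
    have hcol : (decide (rr < 10) && aShip f rr c) = bAt f rr c := by
      by_cases h : rr < 10
      · simp [h, aShip_eq_bAt hrr h h0 h1]
      · have hbf : bAt f rr c = false := bAt_false_top (Or.inr (Or.inl (by omega)))
        simp [h, hbf]
    rw [hcol] at hw
    by_cases hb : bAt f rr c = true
    · have hrr10 : rr < 10 := (bAt_bounds hb).2.1
      rw [cond_collow hrr hrr10 (by omega), cond_colhigh hrr hrr10 (by omega)] at hw
      rw [if_pos hb] at hw
      by_cases hh : (bAt f rr (c-1) || bAt f rr (c+1)) = true
      · rw [if_pos hh] at hw; exact absurd hw (by simp)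
      · rw [if_neg hh] at hw
        rcases hrest : aWalkV f c (rr+1) fuel with _ | rest
        · rw [hrest] at hw; exact absurd hw (by simp)
        · rw [hrest] at hw
          simp only [Option.some.injEq] at hw
          obtain ⟨hsh, hvt⟩ := ih (rr+1) rest (by omega) (by omega) hrest
          have hK : bRunV f c rr (fuel+1) = bRunV f c (rr+1) fuel + 1 := by simp [bRunV, hb]
          constructor
          · rw [← hw, hsh, hK, List.range_succ_eq_map, List.map_cons, List.map_map]
            congr 1
            · simp
            · apply List.map_congr_left
              intro i _
              simp only [Function.comp]
              congr 1
              push_cast; ring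
          · intro i hi
            rw [hK] at hi
            cases i with
            | zero =>
              simp only [Nat.cast_zero, add_zero]
              simp only [Bool.or_eq_true, not_or] at hh
              exact ⟨(Bool.not_eq_true _).mp hh.1, (Bool.not_eq_true _).mp hh.2⟩
            | succ j =>
              have := hvt j (by omega)
              have harr : rr + ((j:Int) + 1) = (rr + 1) + (j:Int) := by ring
              rw [show ((j + 1 : Nat) : Int) = (j:Int) + 1 by push_cast; ring, harr]
              exact this
    · rw [if_neg hb] at hw
      simp only [Option.some.injEq] at hw
      have hK : bRunV f c rr (fuel+1) = 0 := by simp [bRunV, hb]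
      exact ⟨by rw [← hw, hK]; simp, fun i hi => absurd hi (by omega)⟩

lemma aWalkV_run {f : List (List Int)} {c : Int} (h0 : 0 ≤ c) (h1 : c < 10) :
    ∀ (fuel : Nat) (rr : Int), 0 ≤ rr → (10:Int) - rr < fuel →
      (∀ i : Nat, i < bRunV f c rr fuel → bAt f (rr + (i:Int)) (c-1) = false ∧ bAt f (rr + (i:Int)) (c+1) = false) →
      aWalkV f c rr fuel = some ((List.range (bRunV f c rr fuel)).map (fun (i : Nat) => (rr + (i : Int), (c : Int)))) := by
  intro fuel
  induction fuel with
  | zero =>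
    intro rr hrr hf _
    simp [aWalkV, bRunV]
  | succ fuel ih =>
    intro rr hrr hf hvt
    rw [show aWalkV f c rr (fuel+1) =
        (if decide (rr < 10) && aShip f rr c then
          if (decide (0 ≤ c - 1) && aShip f rr (c-1)) || (decide (c + 1 < 10) && aShip f rr (c+1)) then none
          else match aWalkV f c (rr+1) fuel with
            | none => none
            | some rest => some ((rr, c) :: rest)
        else some []) from rfl]
    have hcol : (decide (rr < 10) && aShip f rr c) = bAt f rr c := by
      by_cases h : rr < 10
      · simp [h, aShip_eq_bAt hrr h h0 h1]
      · have hbf : bAt f rr c = false := bAt_false_top (Or.inr (Or.inl (by omega)))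
        simp [h, hbf]
    rw [hcol]
    by_cases hb : bAt f rr c = true
    · have hrr10 : rr < 10 := (bAt_bounds hb).2.1
      rw [cond_collow hrr hrr10 (by omega), cond_colhigh hrr hrr10 (by omega)]
      rw [if_pos hb]
      have hK : bRunV f c rr (fuel+1) = bRunV f c (rr+1) fuel + 1 := by simp [bRunV, hb]
      have h00 := hvt 0 (by omega)
      simp only [Nat.cast_zero, add_zero] at h00
      rw [if_neg (by simp [h00.1, h00.2])]
      have hvt' : ∀ i : Nat, i < bRunV f c (rr+1) fuel → bAt f ((rr+1) + (i:Int)) (c-1) = false ∧ bAt f ((rr+1) + (i:Int)) (c+1) = false := by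
        intro i hi
        have := hvt (i+1) (by omega)
        have harr : rr + ((i + 1 : Nat) : Int) = (rr + 1) + (i:Int) := by push_cast; ring
        rw [harr] at this
        exact this
      rw [ih (rr+1) (by omega) (by omega) hvt']
      simp only [Option.some.injEq]
      rw [hK, List.range_succ_eq_map, List.map_cons, List.map_map]
      congr 1
      · simp
      · apply List.map_congr_left
        intro i _
        simp only [Function.comp]
        congr 1
        push_cast; ring
    · rw [if_neg hb]
      have hK : bRunV f c rr (fuel+1) = 0 := by simp [bRunV, hb]
      rw [hK]; simp

lemma aMark_eq_some : ∀ (cells v v' : List (Int × Int)), aMark v cells = some v' →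
    v' = v ++ cells ∧ cells.Nodup ∧ ∀ q ∈ cells, q ∉ v := by
  intro cells
  induction cells with
  | nil => intro v v' h; simp [aMark] at h; simp [h.symm]
  | cons p ps ih =>
    intro v v' h
    rw [show aMark v (p :: ps) = (if v.contains p then none else aMark (v ++ [p]) ps) from rfl] at h
    by_cases hc : v.contains p
    · rw [if_pos hc] at h; exact absurd h (by simp)
    · rw [if_neg hc] at h
      obtain ⟨h1, h2, h3⟩ := ih (v ++ [p]) v' h
      refine ⟨by rw [h1]; simp, ?_, ?_⟩
      · refine List.nodup_cons.mpr ⟨fun hmem => ?_, h2⟩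
        exact h3 p hmem (by simp)
      · intro q hq
        rcases List.mem_cons.mp hq with rfl | hq'
        · intro hv; exact hc (List.elem_eq_true_of_mem hv)
        · intro hv; exact h3 q hq' (by simp [hv])

lemma aMark_some_of : ∀ (cells v : List (Int × Int)), cells.Nodup → (∀ q ∈ cells, q ∉ v) →
    aMark v cells = some (v ++ cells) := by
  intro cells
  induction cells with
  | nil => intro v _ _; simp [aMark]
  | cons p ps ih =>
    intro v hnd hdis
    rw [show aMark v (p :: ps) = (if v.contains p then none else aMark (v ++ [p]) ps) from rfl]
    rw [if_neg (by
      intro hc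
      exact hdis p (by simp) (List.mem_of_elem_eq_true hc))]
    rw [ih (v ++ [p]) (List.nodup_cons.mp hnd).2 (by
      intro q hq hmem
      rcases List.mem_append.mp hmem with hv | hp
      · exact hdis q (by simp [hq]) hv
      · simp at hp
        subst hp
        exact (List.nodup_cons.mp hnd).1 hq)]
    simp

lemma mem_aNeighbors8 {r c : Int} (q : Int × Int) :
    q ∈ aNeighbors8 r c ↔ (0 ≤ q.1 ∧ q.1 < 10 ∧ 0 ≤ q.2 ∧ q.2 < 10) ∧
      ∃ d ∈ ([(-1,-1),(-1,0),(-1,1),(0,-1),(0,1),(1,-1),(1,0),(1,1)] : List (Int × Int)), q = (r + d.1, c + d.2) := by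
  simp only [aNeighbors8, List.mem_filterMap]
  constructor
  · rintro ⟨d, hd, h⟩
    split at h
    · rename_i hcond
      rw [Option.some.injEq] at h
      subst h
      exact ⟨⟨hcond.1, hcond.2.1, hcond.2.2.1, hcond.2.2.2⟩, d, hd, rfl⟩
    · exact absurd h (by simp)
  · rintro ⟨hb, d, hd, rfl⟩
    refine ⟨d, hd, ?_⟩
    rw [if_pos ⟨hb.1, hb.2.1, hb.2.2.1, hb.2.2.2⟩]

lemma any8_false {f : List (List Int)} {cells : List (Int × Int)}
    (h8 : (cells.any (fun p => (aNeighbors8 p.1 p.2).any (fun q => aShip f q.1 q.2 && !cells.contains q))) = false) :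
    ∀ p ∈ cells, ∀ dr dc : Int,
      (dr, dc) ∈ ([(-1,-1),(-1,0),(-1,1),(0,-1),(0,1),(1,-1),(1,0),(1,1)] : List (Int × Int)) →
      bAt f (p.1 + dr) (p.2 + dc) = true → (p.1 + dr, p.2 + dc) ∈ cells := by
  intro p hp dr dc hd hbat
  have hb := bAt_bounds hbat
  have hmem : ((p.1 + dr, p.2 + dc) : Int × Int) ∈ aNeighbors8 p.1 p.2 :=
    (mem_aNeighbors8 _).mpr ⟨⟨hb.1, hb.2.1, hb.2.2.1, hb.2.2.2.1⟩, (dr, dc), hd, rfl⟩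
  rw [List.any_eq_false] at h8
  have h1 := h8 p hp
  rw [Bool.not_eq_true, List.any_eq_false] at h1
  have h2 := h1 _ hmem
  simp only [Bool.and_eq_true, Bool.not_eq_true', not_and] at h2
  have := h2 hb.2.2.2.2
  exact List.mem_of_elem_eq_true (by simpa using this)

lemma aScan_cons (f : List (List Int)) (r c : Int) (rest : List (Int × Int)) (v : List (Int × Int)) (s : List Int) :
    aScan f ((r, c) :: rest) v s =
    (if !aShip f r c || v.contains (r, c) then aScan f rest v s
    else if aDiagHit f r c then none
    else if (decide (c + 1 < 10) && aShip f r (c+1)) && (decide (r + 1 < 10) && aShip f (r+1) c) then none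
    else
      (if decide (c + 1 < 10) && aShip f r (c+1) then aWalkH f r c 11
       else if decide (r + 1 < 10) && aShip f (r+1) c then aWalkV f c r 11
       else some [(r, c)]).bind (fun cells =>
        (aMark v cells).bind (fun visited' =>
          if cells.any (fun p => (aNeighbors8 p.1 p.2).any (fun q => aShip f q.1 q.2 && !cells.contains q)) then none
          else aScan f rest visited' (s ++ [(cells.length : Int)])))) := rfl

lemma bScan_cons (f : List (List Int)) (r c : Int) (rest : List (Int × Int)) (sizes : List Int) :
    bScan f ((r, c) :: rest) sizes =
    (if !bAt f r c then bScan f rest sizes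
    else if bAt f (r+1) (c+1) || bAt f (r+1) (c-1) then none
    else if (bAt f r (c-1) || bAt f r (c+1)) && (bAt f (r-1) c || bAt f (r+1) c) then none
    else if bAt f r (c+1) && !bAt f r (c-1) then bScan f rest (sizes ++ [(bRunH f r c 11 : Int)])
    else if bAt f (r+1) c && !bAt f (r-1) c then bScan f rest (sizes ++ [(bRunV f c r 11 : Int)])
    else if !(bAt f r (c-1) || bAt f r (c+1) || bAt f (r-1) c || bAt f (r+1) c) then bScan f rest (sizes ++ [(1 : Int)])
    else bScan f rest sizes) := rfl

lemma good_diag {f : List (List Int)} (hG : Good f) {r c : Int} (h : bAt f r c = true) :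
    bAt f (r+1) (c+1) = false ∧ bAt f (r+1) (c-1) = false ∧ bAt f (r-1) (c-1) = false ∧ bAt f (r-1) (c+1) = false := by
  refine ⟨(hG r c h).1, (hG r c h).2.1, ?_, ?_⟩
  · by_contra hx
    rw [Bool.not_eq_false] at hx
    have h2 := (hG _ _ hx).1
    rw [show r - 1 + 1 = r from by ring, show c - 1 + 1 = c from by ring] at h2
    rw [h] at h2; exact absurd h2 (by simp)
  · by_contra hx
    rw [Bool.not_eq_false] at hx
    have h2 := (hG _ _ hx).2.1
    rw [show r - 1 + 1 = r from by ring, show c + 1 - 1 = c from by ring] at h2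
    rw [h] at h2; exact absurd h2 (by simp)

lemma good_bend {f : List (List Int)} (hG : Good f) {r c : Int} (h : bAt f r c = true) :
    (bAt f r (c-1) || bAt f r (c+1)) = false ∨ (bAt f (r-1) c || bAt f (r+1) c) = false := by
  have h2 := (hG r c h).2.2
  rcases Bool.and_eq_false_iff.mp h2 with h1 | h1
  exacts [Or.inl h1, Or.inr h1]

-- the 8-neighbour check certifies CellOK for every cell of a horizontal walk
lemma certH {f : List (List Int)} {r cc : Int} {k : Nat} {cells : List (Int × Int)}
    (hcellseq : cells = (List.range k).map (fun (i : Nat) => ((r : Int), cc + (i : Int))))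
    (hvt : ∀ i : Nat, i < k → bAt f (r-1) (cc + (i:Int)) = false ∧ bAt f (r+1) (cc + (i:Int)) = false)
    (h8 : (cells.any (fun p => (aNeighbors8 p.1 p.2).any (fun q => aShip f q.1 q.2 && !cells.contains q))) = false) :
    ∀ q ∈ cells, CellOK f q.1 q.2 := by
  have h8' := any8_false h8
  intro q hq
  have hq' := hq
  rw [hcellseq] at hq'
  simp only [List.mem_map, List.mem_range] at hq'
  obtain ⟨i, hi, rfl⟩ := hq'
  refine ⟨?_, ?_, ?_⟩
  · by_contra hx
    rw [Bool.not_eq_false] at hx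
    have := h8' _ hq 1 1 (by simp) hx
    rw [hcellseq] at this
    simp only [List.mem_map, List.mem_range, Prod.mk.injEq] at this
    obtain ⟨j, _, hj1, _⟩ := this
    omega
  · by_contra hx
    rw [Bool.not_eq_false] at hx
    have := h8' _ hq 1 (-1) (by simp) hx
    rw [hcellseq] at this
    simp only [List.mem_map, List.mem_range, Prod.mk.injEq] at this
    obtain ⟨j, _, hj1, _⟩ := this
    omega
  · have := hvt i hi
    simp only [this.1, this.2]
    simp

-- the 8-neighbour check certifies CellOK for every cell of a vertical walk
lemma certV {f : List (List Int)} {rr c : Int} {k : Nat} {cells : List (Int × Int)}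
    (hcellseq : cells = (List.range k).map (fun (i : Nat) => (rr + (i : Int), (c : Int))))
    (hvt : ∀ i : Nat, i < k → bAt f (rr + (i:Int)) (c-1) = false ∧ bAt f (rr + (i:Int)) (c+1) = false)
    (h8 : (cells.any (fun p => (aNeighbors8 p.1 p.2).any (fun q => aShip f q.1 q.2 && !cells.contains q))) = false) :
    ∀ q ∈ cells, CellOK f q.1 q.2 := by
  have h8' := any8_false h8
  intro q hq
  have hq' := hq
  rw [hcellseq] at hq'
  simp only [List.mem_map, List.mem_range] at hq'
  obtain ⟨i, hi, rfl⟩ := hq'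
  refine ⟨?_, ?_, ?_⟩
  · by_contra hx
    rw [Bool.not_eq_false] at hx
    have := h8' _ hq 1 1 (by simp) hx
    rw [hcellseq] at this
    simp only [List.mem_map, List.mem_range, Prod.mk.injEq] at this
    obtain ⟨j, _, _, hj2⟩ := this
    omega
  · by_contra hx
    rw [Bool.not_eq_false] at hx
    have := h8' _ hq 1 (-1) (by simp) hx
    rw [hcellseq] at this
    simp only [List.mem_map, List.mem_range, Prod.mk.injEq] at this
    obtain ⟨j, _, _, hj2⟩ := this
    omega
  · have := hvt i hi
    simp only [this.1, this.2]
    simp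

-- the 8-neighbour check certifies CellOK for a single-cell component
lemma certS {f : List (List Int)} {r c : Int}
    (h8 : (([((r : Int), (c : Int))] : List (Int × Int)).any (fun p => (aNeighbors8 p.1 p.2).any (fun q => aShip f q.1 q.2 && !([((r : Int), (c : Int))] : List (Int × Int)).contains q))) = false) :
    ∀ q ∈ ([((r : Int), (c : Int))] : List (Int × Int)), CellOK f q.1 q.2 := by
  have h8' := any8_false h8
  have hdir : ∀ dr dc : Int,
      (dr, dc) ∈ ([(-1,-1),(-1,0),(-1,1),(0,-1),(0,1),(1,-1),(1,0),(1,1)] : List (Int × Int)) →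
      ¬(dr = 0 ∧ dc = 0) → bAt f (r + dr) (c + dc) = false := by
    intro dr dc hd hne
    by_contra hx
    rw [Bool.not_eq_false] at hx
    have := h8' (r, c) (by simp) dr dc hd hx
    simp only [List.mem_singleton, Prod.mk.injEq] at this
    exact hne ⟨by omega, by omega⟩
  intro q hq
  simp only [List.mem_singleton] at hq
  subst hq
  refine ⟨hdir 1 1 (by simp) (by omega), hdir 1 (-1) (by simp) (by omega), ?_⟩
  have h1 : bAt f r (c - 1) = false := by
    have := hdir 0 (-1) (by simp) (by omega)
    rwa [show r + 0 = r from by ring, show c + (-1) = c - 1 from by ring] at this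
  have h2 : bAt f r (c + 1) = false := by
    have := hdir 0 1 (by simp) (by omega)
    rwa [show r + 0 = r from by ring] at this
  simp [h1, h2]

-- soundness of A's scan: a completed scan visits every ship cell, and certifies CellOK
-- for everything it visits
lemma aScan_sound {f : List (List Int)} : ∀ (cs : List (Int × Int)),
    (∀ p ∈ cs, 0 ≤ p.1 ∧ p.1 < 10 ∧ 0 ≤ p.2 ∧ p.2 < 10) →
    ∀ (v : List (Int × Int)) (s : List Int) (v' : List (Int × Int)) (s' : List Int),
    aScan f cs v s = some (v', s') →
    (∀ q ∈ v, q ∈ v') ∧ (∀ p ∈ cs, bAt f p.1 p.2 = true → p ∈ v') ∧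
    (∀ q, q ∈ v' → q ∈ v ∨ CellOK f q.1 q.2) := by
  intro cs
  induction cs with
  | nil =>
    intro _ v s v' s' h
    simp only [aScan, Option.some.injEq, Prod.mk.injEq] at h
    obtain ⟨rfl, rfl⟩ := h
    exact ⟨fun q hq => hq, by simp, fun q hq => Or.inl hq⟩
  | cons p rest ih =>
    obtain ⟨r, c⟩ := p
    intro hbs v s v' s' h
    obtain ⟨hr0, hr1, hc0, hc1⟩ := hbs (r, c) (by simp)
    have hbs' : ∀ p ∈ rest, 0 ≤ p.1 ∧ p.1 < 10 ∧ 0 ≤ p.2 ∧ p.2 < 10 := fun p hp => hbs p (by simp [hp])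
    rw [aScan_cons] at h
    by_cases hskip : (!aShip f r c || v.contains (r, c)) = true
    · rw [if_pos hskip] at h
      obtain ⟨ihS, ihAll, ihOK⟩ := ih hbs' v s v' s' h
      refine ⟨ihS, ?_, ihOK⟩
      intro p hp hbat
      rcases List.mem_cons.mp hp with heq | hp'
      · subst heq
        have hsh : aShip f (r, c).1 (r, c).2 = true := (bAt_bounds hbat).2.2.2.2
        have hcont : v.contains ((r, c) : Int × Int) = true := by
          rcases Bool.or_eq_true_iff.mp hskip with hx | hx
          · rw [Bool.not_eq_true'] at hx
            exact absurd hsh (by simp [hx])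
          · exact hx
        exact ihS (r, c) (List.mem_of_elem_eq_true hcont)
      · exact ihAll p hp' hbat
    · rw [if_neg hskip] at h
      by_cases hdiag : aDiagHit f r c = true
      · rw [if_pos hdiag] at h; exact absurd h (by simp)
      · rw [if_neg hdiag] at h
        by_cases hrd : ((decide (c + 1 < 10) && aShip f r (c+1)) && (decide (r + 1 < 10) && aShip f (r+1) c)) = true
        · rw [if_pos hrd] at h; exact absurd h (by simp)
        · rw [if_neg hrd] at h
          rcases hcells : (if decide (c + 1 < 10) && aShip f r (c+1) then aWalkH f r c 11
              else if decide (r + 1 < 10) && aShip f (r+1) c then aWalkV f c r 11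
              else some [((r : Int), (c : Int))]) with _ | cells
          · rw [hcells] at h; exact absurd h (by simp)
          · rw [hcells] at h
            rw [Option.bind_some] at h
            rcases hm : aMark v cells with _ | v2
            · rw [hm] at h; exact absurd h (by simp)
            · rw [hm] at h
              rw [Option.bind_some] at h
              by_cases h8 : (cells.any (fun p => (aNeighbors8 p.1 p.2).any (fun q => aShip f q.1 q.2 && !cells.contains q))) = true
              · rw [if_pos h8] at h; exact absurd h (by simp)
              · rw [if_neg h8] at h
                have h8' : (cells.any (fun p => (aNeighbors8 p.1 p.2).any (fun q => aShip f q.1 q.2 && !cells.contains q))) = false :=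
                  Bool.not_eq_true _ |>.mp h8
                obtain ⟨hv2, hnd, hdisj⟩ := aMark_eq_some cells v v2 hm
                obtain ⟨ihS, ihAll, ihOK⟩ := ih hbs' v2 _ v' s' h
                have hsh : aShip f r c = true := by
                  by_contra hx
                  rw [Bool.not_eq_true] at hx
                  exact hskip (by simp [hx])
                have hb : bAt f r c = true := by rw [← aShip_eq_bAt hr0 hr1 hc0 hc1]; exact hsh
                -- head cell is in the walked component, and every walked cell is certified
                have hmain : ((r, c) : Int × Int) ∈ cells ∧ ∀ q ∈ cells, CellOK f q.1 q.2 := by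
                  by_cases hR : (decide (c + 1 < 10) && aShip f r (c+1)) = true
                  · rw [if_pos hR] at hcells
                    obtain ⟨hsh2, hvt⟩ := aWalkH_shape hr0 hr1 11 c cells hc0 (by omega) hcells
                    have hK1 : 1 ≤ bRunH f r c 11 := bRunH_ge hc0 (by omega) (m := 1)
                      (fun i hi => by
                        have : i = 0 := by omega
                        subst this
                        simpa using hb)
                    constructor
                    · rw [hsh2]
                      simp only [List.mem_map, List.mem_range]
                      exact ⟨0, by omega, by simp⟩
                    · exact certH hsh2 hvt h8'
                  · rw [if_neg hR] at hcells
                    by_cases hD : (decide (r + 1 < 10) && aShip f (r+1) c) = true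
                    · rw [if_pos hD] at hcells
                      obtain ⟨hsh2, hvt⟩ := aWalkV_shape hc0 hc1 11 r cells hr0 (by omega) hcells
                      have hK1 : 1 ≤ bRunV f c r 11 := bRunV_ge hr0 (by omega) (m := 1)
                        (fun i hi => by
                          have : i = 0 := by omega
                          subst this
                          simpa using hb)
                      constructor
                      · rw [hsh2]
                        simp only [List.mem_map, List.mem_range]
                        exact ⟨0, by omega, by simp⟩
                      · exact certV hsh2 hvt h8'
                    · rw [if_neg hD] at hcells
                      rw [Option.some.injEq] at hcells
                      subst hcells
                      exact ⟨by simp, certS h8'⟩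
                refine ⟨fun q hq => ihS q (by rw [hv2]; simp [hq]), ?_, ?_⟩
                · intro p hp hbat
                  rcases List.mem_cons.mp hp with heq | hp'
                  · subst heq
                    exact ihS _ (by rw [hv2]; simp [hmain.1])
                  · exact ihAll p hp' hbat
                · intro q hq
                  rcases ihOK q hq with hv2m | hok
                  · rw [hv2] at hv2m
                    rcases List.mem_append.mp hv2m with hv | hcell
                    · exact Or.inl hv
                    · exact Or.inr (hmain.2 q hcell)
                  · exact Or.inr hok

-- B's scan returns none as soon as some ship cell violates CellOK
lemma bScan_none {f : List (List Int)} : ∀ (cs : List (Int × Int)) (sizes : List Int),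
    (∃ p ∈ cs, bAt f p.1 p.2 = true ∧ ¬ CellOK f p.1 p.2) → bScan f cs sizes = none := by
  intro cs
  induction cs with
  | nil => rintro sizes ⟨p, hp, _⟩; simp at hp
  | cons p rest ih =>
    rintro sizes ⟨q, hq, hqs, hqnot⟩
    obtain ⟨r, c⟩ := p
    rcases List.mem_cons.mp hq with heq | hq'
    · subst heq
      rw [bScan_cons]
      rw [if_neg (by simp [hqs])]
      by_cases hd : (bAt f (r+1) (c+1) || bAt f (r+1) (c-1)) = true
      · rw [if_pos hd]
      · rw [if_neg hd]
        simp only [Bool.or_eq_true, not_or] at hd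
        have hbend : ((bAt f r (c-1) || bAt f r (c+1)) && (bAt f (r-1) c || bAt f (r+1) c)) = true := by
          by_contra hx
          exact hqnot ⟨(Bool.not_eq_true _).mp hd.1, (Bool.not_eq_true _).mp hd.2, (Bool.not_eq_true _).mp hx⟩
        rw [if_pos hbend]
    · have ihr := fun sz => ih sz ⟨q, hq', hqs, hqnot⟩
      rw [bScan_cons]
      split_ifs <;> first | rfl | exact ihr _

-- first cells of maximal straight runs, and the cells of the run they head
def isStartH (f : List (List Int)) (r c : Int) : Prop :=
  bAt f r c = true ∧ bAt f r (c+1) = true ∧ bAt f r (c-1) = false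

def isStartV (f : List (List Int)) (r c : Int) : Prop :=
  bAt f r c = true ∧ bAt f (r+1) c = true ∧ bAt f (r-1) c = false

def isSingle (f : List (List Int)) (r c : Int) : Prop :=
  bAt f r c = true ∧ bAt f r (c-1) = false ∧ bAt f r (c+1) = false ∧ bAt f (r-1) c = false ∧ bAt f (r+1) c = false

def isStart (f : List (List Int)) (p : Int × Int) : Prop :=
  isStartH f p.1 p.2 ∨ isStartV f p.1 p.2 ∨ isSingle f p.1 p.2

def runCells (f : List (List Int)) (p : Int × Int) : List (Int × Int) :=
  if bAt f p.1 (p.2+1) then (List.range (bRunH f p.1 p.2 11)).map (fun (i : Nat) => (p.1, p.2 + (i:Int)))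
  else if bAt f (p.1+1) p.2 then (List.range (bRunV f p.2 p.1 11)).map (fun (i : Nat) => (p.1 + (i:Int), p.2))
  else [p]

lemma isStart_bAt {f : List (List Int)} {p : Int × Int} (h : isStart f p) : bAt f p.1 p.2 = true := by
  rcases h with h | h | h <;> exact h.1

lemma runH_ship {f : List (List Int)} {r a : Int} (ha0 : 0 ≤ a) {i : Nat} (hi : i < bRunH f r a 11) :
    bAt f r (a + (i:Int)) = true :=
  (bRunH_spec (f := f) (r := r) 11 a ha0 (by omega)).1 i hi

lemma runH_end {f : List (List Int)} {r a : Int} (ha0 : 0 ≤ a) :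
    bAt f r (a + ((bRunH f r a 11 : Nat) : Int)) = false :=
  (bRunH_spec (f := f) (r := r) 11 a ha0 (by omega)).2

lemma runV_ship {f : List (List Int)} {c a : Int} (ha0 : 0 ≤ a) {i : Nat} (hi : i < bRunV f c a 11) :
    bAt f (a + (i:Int)) c = true :=
  (bRunV_spec (f := f) (c := c) 11 a ha0 (by omega)).1 i hi

lemma runV_end {f : List (List Int)} {c a : Int} (ha0 : 0 ≤ a) :
    bAt f (a + ((bRunV f c a 11 : Nat) : Int)) c = false :=
  (bRunV_spec (f := f) (c := c) 11 a ha0 (by omega)).2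

lemma runH_interval {f : List (List Int)} {r a : Int} (ha : bAt f r a = true) {i : Nat} (hi : i < bRunH f r a 11) :
    ∀ m : Int, a ≤ m → m ≤ a + (i:Int) → bAt f r m = true := by
  intro m h1 h2
  have ha0 : 0 ≤ a := (bAt_bounds ha).2.2.1
  have hlt : (m - a).toNat < bRunH f r a 11 := by omega
  have := runH_ship (f := f) (r := r) ha0 hlt
  rwa [show a + (((m - a).toNat : Nat) : Int) = m from by omega] at this

lemma runV_interval {f : List (List Int)} {c a : Int} (ha : bAt f a c = true) {i : Nat} (hi : i < bRunV f c a 11) :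
    ∀ m : Int, a ≤ m → m ≤ a + (i:Int) → bAt f m c = true := by
  intro m h1 h2
  have ha0 : 0 ≤ a := (bAt_bounds ha).1
  have hlt : (m - a).toNat < bRunV f c a 11 := by omega
  have := runV_ship (f := f) (c := c) ha0 hlt
  rwa [show a + (((m - a).toNat : Nat) : Int) = m from by omega] at this

lemma runH_nbr {f : List (List Int)} {r a : Int} (ha : bAt f r a = true) (har : bAt f r (a+1) = true)
    {i : Nat} (hi : i < bRunH f r a 11) :
    (bAt f r (a + (i:Int) - 1) || bAt f r (a + (i:Int) + 1)) = true := by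
  have ha0 : 0 ≤ a := (bAt_bounds ha).2.2.1
  cases i with
  | zero =>
    apply Bool.or_eq_true_iff.mpr
    right
    simpa using har
  | succ j =>
    apply Bool.or_eq_true_iff.mpr
    left
    have := runH_ship (f := f) (r := r) ha0 (i := j) (by omega)
    rwa [show a + ((j + 1 : Nat) : Int) - 1 = a + (j : Int) from by push_cast; ring]

lemma runV_nbr {f : List (List Int)} {c a : Int} (ha : bAt f a c = true) (had : bAt f (a+1) c = true)
    {i : Nat} (hi : i < bRunV f c a 11) :
    (bAt f (a + (i:Int) - 1) c || bAt f (a + (i:Int) + 1) c) = true := by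
  have ha0 : 0 ≤ a := (bAt_bounds ha).1
  cases i with
  | zero =>
    apply Bool.or_eq_true_iff.mpr
    right
    simpa using had
  | succ j =>
    apply Bool.or_eq_true_iff.mpr
    left
    have := runV_ship (f := f) (c := c) ha0 (i := j) (by omega)
    rwa [show a + ((j + 1 : Nat) : Int) - 1 = a + (j : Int) from by push_cast; ring]

lemma start_branchH {f : List (List Int)} (hG : Good f) {s : Int × Int} (hss : isStart f s)
    (hR : bAt f s.1 (s.2+1) = true) : isStartH f s.1 s.2 := by
  rcases hss with h | h | h
  · exact h
  · exfalso
    have := (hG s.1 s.2 h.1).2.2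
    rw [hR, h.2.1] at this
    simp at this
  · exact absurd hR (by simp [h.2.2.1])

lemma start_branchV {f : List (List Int)} {s : Int × Int} (hss : isStart f s)
    (hR : bAt f s.1 (s.2+1) = false) (hD : bAt f (s.1+1) s.2 = true) : isStartV f s.1 s.2 := by
  rcases hss with h | h | h
  · exact absurd h.2.1 (by simp [hR])
  · exact h
  · exact absurd hD (by simp [h.2.2.2.2])

lemma start_branchS {f : List (List Int)} {s : Int × Int} (hss : isStart f s)
    (hR : bAt f s.1 (s.2+1) = false) (hD : bAt f (s.1+1) s.2 = false) : isSingle f s.1 s.2 := by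
  rcases hss with h | h | h
  · exact absurd h.2.1 (by simp [hR])
  · exact absurd h.2.1 (by simp [hD])
  · exact h

lemma find_left {f : List (List Int)} {r : Int} : ∀ (k : Nat) (c : Int), c.toNat ≤ k → bAt f r c = true →
    ∃ j : Nat, (∀ i : Nat, i ≤ j → bAt f r (c - (i:Int)) = true) ∧ bAt f r (c - (j:Int) - 1) = false := by
  intro k
  induction k with
  | zero =>
    intro c hc h
    have hb := bAt_bounds h
    have hc0 : c = 0 := by omega
    subst hc0
    refine ⟨0, fun i hi => ?_, ?_⟩
    · have : i = 0 := Nat.le_zero.mp hi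
      subst this; simpa using h
    · exact bAt_false_top (by omega)
  | succ k ih =>
    intro c hc h
    by_cases hl : bAt f r (c-1) = true
    · have hb := bAt_bounds hl
      obtain ⟨j, hj1, hj2⟩ := ih (c-1) (by omega) hl
      refine ⟨j+1, ?_, ?_⟩
      · intro i hi
        cases i with
        | zero => simpa using h
        | succ m =>
          have := hj1 m (by omega)
          have harr : c - ((m + 1 : Nat) : Int) = (c - 1) - (m : Int) := by push_cast; ring
          rw [harr]; exact this
      · have harr : c - ((j + 1 : Nat) : Int) - 1 = (c - 1) - (j : Int) - 1 := by push_cast; ring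
        rw [harr]; exact hj2
    · refine ⟨0, fun i hi => ?_, ?_⟩
      · have : i = 0 := Nat.le_zero.mp hi
        subst this; simpa using h
      · have harr : c - ((0 : Nat) : Int) - 1 = c - 1 := by push_cast; ring
        rw [harr]; exact (Bool.not_eq_true _).mp hl

lemma find_up {f : List (List Int)} {c : Int} : ∀ (k : Nat) (r : Int), r.toNat ≤ k → bAt f r c = true →
    ∃ j : Nat, (∀ i : Nat, i ≤ j → bAt f (r - (i:Int)) c = true) ∧ bAt f (r - (j:Int) - 1) c = false := by
  intro k
  induction k with
  | zero =>
    intro r hr h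
    have hb := bAt_bounds h
    have hr0 : r = 0 := by omega
    subst hr0
    refine ⟨0, fun i hi => ?_, ?_⟩
    · have : i = 0 := Nat.le_zero.mp hi
      subst this; simpa using h
    · exact bAt_false_top (by omega)
  | succ k ih =>
    intro r hr h
    by_cases hl : bAt f (r-1) c = true
    · have hb := bAt_bounds hl
      obtain ⟨j, hj1, hj2⟩ := ih (r-1) (by omega) hl
      refine ⟨j+1, ?_, ?_⟩
      · intro i hi
        cases i with
        | zero => simpa using h
        | succ m =>
          have := hj1 m (by omega)
          have harr : r - ((m + 1 : Nat) : Int) = (r - 1) - (m : Int) := by push_cast; ring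
          rw [harr]; exact this
      · have harr : r - ((j + 1 : Nat) : Int) - 1 = (r - 1) - (j : Int) - 1 := by push_cast; ring
        rw [harr]; exact hj2
    · refine ⟨0, fun i hi => ?_, ?_⟩
      · have : i = 0 := Nat.le_zero.mp hi
        subst this; simpa using h
      · have harr : r - ((0 : Nat) : Int) - 1 = r - 1 := by push_cast; ring
        rw [harr]; exact (Bool.not_eq_true _).mp hl

-- every ship cell lies in the run of some start that is not later in row-major order
lemma exists_start {f : List (List Int)} (hG : Good f) {r c : Int} (h : bAt f r c = true) :
    ∃ s : Int × Int, isStart f s ∧ (r, c) ∈ runCells f s ∧ (s.1 < r ∨ (s.1 = r ∧ s.2 ≤ c)) := by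
  obtain ⟨hr0, hr1, hc0, hc1, _⟩ := bAt_bounds h
  by_cases hL : bAt f r (c - 1) = true
  · obtain ⟨j, hj1, hj2⟩ := find_left (c-1).toNat (c-1) le_rfl hL
    have hsA : bAt f r ((c - 1) - (j:Int)) = true := hj1 j le_rfl
    have hall : ∀ i : Nat, i ≤ j + 1 → bAt f r (((c - 1) - (j:Int)) + (i:Int)) = true := by
      intro i hi
      by_cases hij : i ≤ j
      · have := hj1 (j - i) (by omega)
        rwa [show (c - 1) - ((j - i : Nat) : Int) = ((c - 1) - (j:Int)) + (i:Int) from by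
          push_cast [Nat.cast_sub hij]; ring] at this
      · have : i = j + 1 := by omega
        subst this
        rwa [show ((c - 1) - (j:Int)) + ((j + 1 : Nat) : Int) = c from by push_cast; ring]
    have hright : bAt f r (((c - 1) - (j:Int)) + 1) = true := by
      have := hall 1 (by omega)
      simpa using this
    have ha0 : 0 ≤ (c - 1) - (j:Int) := (bAt_bounds hsA).2.2.1
    have hK : j + 2 ≤ bRunH f r ((c - 1) - (j:Int)) 11 :=
      bRunH_ge ha0 (by omega) (m := j + 2) (fun i hi => hall i (by omega))
    refine ⟨(r, (c - 1) - (j:Int)), Or.inl ⟨hsA, hright, ?_⟩, ?_, Or.inr ⟨rfl, by omega⟩⟩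
    · rwa [show (c - 1) - (j:Int) - 1 = c - 1 - (j:Int) - 1 from rfl] at hj2
    · unfold runCells
      rw [if_pos hright]
      simp only [List.mem_map, List.mem_range]
      refine ⟨j + 1, by omega, ?_⟩
      rw [Prod.mk.injEq]
      exact ⟨rfl, by push_cast; ring⟩
  · by_cases hU : bAt f (r-1) c = true
    · obtain ⟨j, hj1, hj2⟩ := find_up (r-1).toNat (r-1) le_rfl hU
      have hsA : bAt f ((r - 1) - (j:Int)) c = true := hj1 j le_rfl
      have hall : ∀ i : Nat, i ≤ j + 1 → bAt f (((r - 1) - (j:Int)) + (i:Int)) c = true := by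
        intro i hi
        by_cases hij : i ≤ j
        · have := hj1 (j - i) (by omega)
          rwa [show (r - 1) - ((j - i : Nat) : Int) = ((r - 1) - (j:Int)) + (i:Int) from by
            push_cast [Nat.cast_sub hij]; ring] at this
        · have : i = j + 1 := by omega
          subst this
          rwa [show ((r - 1) - (j:Int)) + ((j + 1 : Nat) : Int) = r from by push_cast; ring]
      have hdown : bAt f (((r - 1) - (j:Int)) + 1) c = true := by
        have := hall 1 (by omega)
        simpa using this
      have ha0 : 0 ≤ (r - 1) - (j:Int) := (bAt_bounds hsA).1
      have hK : j + 2 ≤ bRunV f c ((r - 1) - (j:Int)) 11 :=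
        bRunV_ge ha0 (by omega) (m := j + 2) (fun i hi => hall i (by omega))
      have hnoR : bAt f ((r - 1) - (j:Int)) (c + 1) = false := by
        by_contra hx
        rw [Bool.not_eq_false] at hx
        have := (hG _ _ hsA).2.2
        rw [hx, hdown] at this
        simp at this
      refine ⟨((r - 1) - (j:Int), c), Or.inr (Or.inl ⟨hsA, hdown, hj2⟩), ?_, Or.inl (by omega)⟩
      unfold runCells
      rw [if_neg (by simp [hnoR]), if_pos hdown]
      simp only [List.mem_map, List.mem_range]
      refine ⟨j + 1, by omega, ?_⟩
      rw [Prod.mk.injEq]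
      exact ⟨by push_cast; ring, rfl⟩
    · refine ⟨(r, c), ?_, ?_, Or.inr ⟨rfl, le_refl c⟩⟩
      · by_cases hR : bAt f r (c+1) = true
        · exact Or.inl ⟨h, hR, (Bool.not_eq_true _).mp hL⟩
        · by_cases hD : bAt f (r+1) c = true
          · exact Or.inr (Or.inl ⟨h, hD, (Bool.not_eq_true _).mp hU⟩)
          · exact Or.inr (Or.inr ⟨h, (Bool.not_eq_true _).mp hL, (Bool.not_eq_true _).mp hR,
              (Bool.not_eq_true _).mp hU, (Bool.not_eq_true _).mp hD⟩)
      · unfold runCells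
        by_cases hR : bAt f r (c+1) = true
        · rw [if_pos hR]
          simp only [List.mem_map, List.mem_range]
          refine ⟨0, ?_, by simp⟩
          have : 1 ≤ bRunH f r c 11 := bRunH_ge hc0 (by omega) (m := 1)
            (fun i hi => by
              have : i = 0 := by omega
              subst this; simpa using h)
          omega
        · rw [if_neg (by simp [hR])]
          by_cases hD : bAt f (r+1) c = true
          · rw [if_pos hD]
            simp only [List.mem_map, List.mem_range]
            refine ⟨0, ?_, by simp⟩
            have : 1 ≤ bRunV f c r 11 := bRunV_ge hr0 (by omega) (m := 1)
              (fun i hi => by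
                have : i = 0 := by omega
                subst this; simpa using h)
            omega
          · rw [if_neg (by simp [hD])]
            simp

-- a non-start cell of a run has a ship cell to its left or above it
lemma run_interior {f : List (List Int)} {s p : Int × Int} (hs : bAt f s.1 s.2 = true)
    (hp : p ∈ runCells f s) (hne : p ≠ s) :
    bAt f p.1 (p.2 - 1) = true ∨ bAt f (p.1 - 1) p.2 = true := by
  have hb := bAt_bounds hs
  unfold runCells at hp
  by_cases hR : bAt f s.1 (s.2+1) = true
  · rw [if_pos hR] at hp
    simp only [List.mem_map, List.mem_range] at hp
    obtain ⟨i, hi, heq⟩ := hp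
    subst heq
    have hi0 : i ≠ 0 := by
      rintro rfl
      exact hne (by simp)
    left
    have := runH_ship (f := f) (r := s.1) hb.2.2.1 (i := i - 1) (by omega)
    simp only
    rwa [show s.2 + ((i : Nat) : Int) - 1 = s.2 + ((i - 1 : Nat) : Int) from by
      push_cast [Nat.cast_sub (by omega : 1 ≤ i)]; ring]
  · rw [if_neg (by simp [hR])] at hp
    by_cases hD : bAt f (s.1+1) s.2 = true
    · rw [if_pos hD] at hp
      simp only [List.mem_map, List.mem_range] at hp
      obtain ⟨i, hi, heq⟩ := hp
      subst heq
      have hi0 : i ≠ 0 := by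
        rintro rfl
        exact hne (by simp)
      right
      have := runV_ship (f := f) (c := s.2) hb.1 (i := i - 1) (by omega)
      simp only
      rwa [show s.1 + ((i : Nat) : Int) - 1 = s.1 + ((i - 1 : Nat) : Int) from by
        push_cast [Nat.cast_sub (by omega : 1 ≤ i)]; ring]
    · rw [if_neg (by simp [hD])] at hp
      simp only [List.mem_singleton] at hp
      exact absurd hp hne

-- B's emit conditions all fail at a ship cell that has a ship to its left or above
lemma nonstart_conds {f : List (List Int)} (hG : Good f) {r c : Int} (h : bAt f r c = true)
    (hlu : bAt f r (c - 1) = true ∨ bAt f (r-1) c = true) :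
    (bAt f r (c+1) && !bAt f r (c-1)) = false ∧
    (bAt f (r+1) c && !bAt f (r-1) c) = false ∧
    (bAt f r (c-1) || bAt f r (c+1) || bAt f (r-1) c || bAt f (r+1) c) = true ∧
    ¬ isStart f (r, c) := by
  rcases hlu with hl | hu
  · have hnd : bAt f (r+1) c = false := by
      by_contra hx
      rw [Bool.not_eq_false] at hx
      have := (hG r c h).2.2
      rw [hl, hx] at this
      simp at this
    refine ⟨by simp [hl], by simp [hnd], by simp [hl], ?_⟩
    rintro (hs | hs | hs)
    · exact absurd hl (by simp [hs.2.2])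
    · exact absurd hs.2.1 (by simp [hnd])
    · exact absurd hl (by simp [hs.2.1])
  · have hnr : bAt f r (c+1) = false := by
      by_contra hx
      rw [Bool.not_eq_false] at hx
      have := (hG r c h).2.2
      rw [hu, hx] at this
      simp at this
    refine ⟨by simp [hnr], by simp [hu], by simp [hu], ?_⟩
    rintro (hs | hs | hs)
    · exact absurd hs.2.1 (by simp [hnr])
    · exact absurd hu (by simp [hs.2.2])
    · exact absurd hu (by simp [hs.2.2.2.1])

-- runs of distinct starts are disjoint
lemma runs_disjoint {f : List (List Int)} (hG : Good f) {s t p : Int × Int}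
    (hss : isStart f s) (hts : isStart f t)
    (hps : p ∈ runCells f s) (hpt : p ∈ runCells f t) : s = t := by
  have hsb := isStart_bAt hss
  have htb := isStart_bAt hts
  -- characterize membership in each branch
  unfold runCells at hps hpt
  by_cases hsR : bAt f s.1 (s.2+1) = true
  · rw [if_pos hsR] at hps
    simp only [List.mem_map, List.mem_range] at hps
    obtain ⟨i, hi, heqs⟩ := hps
    have hsH := start_branchH hG hss hsR
    have hpnbr : (bAt f p.1 (p.2 - 1) || bAt f p.1 (p.2 + 1)) = true := by
      rw [← heqs]
      exact runH_nbr hsb hsR hi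
    have hpb : bAt f p.1 p.2 = true := by
      rw [← heqs]
      exact runH_ship (bAt_bounds hsb).2.2.1 hi
    by_cases htR : bAt f t.1 (t.2+1) = true
    · rw [if_pos htR] at hpt
      simp only [List.mem_map, List.mem_range] at hpt
      obtain ⟨i2, hi2, heqt⟩ := hpt
      have htH := start_branchH hG hts htR
      have hrow : s.1 = t.1 := by
        have h1 : (s.1, s.2 + (i:Int)).1 = p.1 := by rw [heqs]
        have h2 : (t.1, t.2 + (i2:Int)).1 = p.1 := by rw [heqt]
        simp at h1 h2
        omega
      have hcols : s.2 + (i:Int) = t.2 + (i2:Int) := by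
        have h1 : (s.1, s.2 + (i:Int)).2 = p.2 := by rw [heqs]
        have h2 : (t.1, t.2 + (i2:Int)).2 = p.2 := by rw [heqt]
        simp at h1 h2
        omega
      have hcol : s.2 = t.2 := by
        rcases lt_trichotomy s.2 t.2 with hlt | heq | hgt
        · exfalso
          have : bAt f s.1 (t.2 - 1) = true :=
            runH_interval hsb hi (t.2 - 1) (by omega) (by omega)
          rw [hrow] at this
          exact absurd this (by simp [htH.2.2])
        · exact heq
        · exfalso
          have : bAt f t.1 (s.2 - 1) = true :=
            runH_interval htb hi2 (s.2 - 1) (by omega) (by omega)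
          rw [← hrow] at this
          exact absurd this (by simp [hsH.2.2])
      exact Prod.ext hrow hcol
    · rw [if_neg (by simp [htR])] at hpt
      by_cases htD : bAt f (t.1+1) t.2 = true
      · rw [if_pos htD] at hpt
        simp only [List.mem_map, List.mem_range] at hpt
        obtain ⟨i2, hi2, heqt⟩ := hpt
        exfalso
        have hpnbrV : (bAt f (p.1 - 1) p.2 || bAt f (p.1 + 1) p.2) = true := by
          rw [← heqt]
          exact runV_nbr htb htD hi2
        have := (hG p.1 p.2 hpb).2.2
        rw [hpnbr, hpnbrV] at this
        simp at this
      · rw [if_neg (by simp [htD])] at hpt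
        simp only [List.mem_singleton] at hpt
        subst hpt
        have htS := start_branchS hts ((Bool.not_eq_true _).mp htR) ((Bool.not_eq_true _).mp htD)
        exfalso
        rcases Bool.or_eq_true_iff.mp hpnbr with hx | hx
        · exact absurd hx (by simp [htS.2.1])
        · exact absurd hx (by simp [htS.2.2.1])
  · rw [if_neg (by simp [hsR])] at hps
    by_cases hsD : bAt f (s.1+1) s.2 = true
    · rw [if_pos hsD] at hps
      simp only [List.mem_map, List.mem_range] at hps
      obtain ⟨i, hi, heqs⟩ := hps
      have hsV := start_branchV hss ((Bool.not_eq_true _).mp hsR) hsD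
      have hpnbr : (bAt f (p.1 - 1) p.2 || bAt f (p.1 + 1) p.2) = true := by
        rw [← heqs]
        exact runV_nbr hsb hsD hi
      have hpb : bAt f p.1 p.2 = true := by
        rw [← heqs]
        exact runV_ship (bAt_bounds hsb).1 hi
      by_cases htR : bAt f t.1 (t.2+1) = true
      · rw [if_pos htR] at hpt
        simp only [List.mem_map, List.mem_range] at hpt
        obtain ⟨i2, hi2, heqt⟩ := hpt
        exfalso
        have hpnbrH : (bAt f p.1 (p.2 - 1) || bAt f p.1 (p.2 + 1)) = true := by
          rw [← heqt]
          exact runH_nbr htb htR hi2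
        have := (hG p.1 p.2 hpb).2.2
        rw [hpnbr, hpnbrH] at this
        simp at this
      · rw [if_neg (by simp [htR])] at hpt
        by_cases htD : bAt f (t.1+1) t.2 = true
        · rw [if_pos htD] at hpt
          simp only [List.mem_map, List.mem_range] at hpt
          obtain ⟨i2, hi2, heqt⟩ := hpt
          have htV := start_branchV hts ((Bool.not_eq_true _).mp htR) htD
          have hcol : s.2 = t.2 := by
            have h1 : (s.1 + (i:Int), s.2).2 = p.2 := by rw [heqs]
            have h2 : (t.1 + (i2:Int), t.2).2 = p.2 := by rw [heqt]
            simp at h1 h2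
            omega
          have hrows : s.1 + (i:Int) = t.1 + (i2:Int) := by
            have h1 : (s.1 + (i:Int), s.2).1 = p.1 := by rw [heqs]
            have h2 : (t.1 + (i2:Int), t.2).1 = p.1 := by rw [heqt]
            simp at h1 h2
            omega
          have hrow : s.1 = t.1 := by
            rcases lt_trichotomy s.1 t.1 with hlt | heq | hgt
            · exfalso
              have : bAt f (t.1 - 1) s.2 = true :=
                runV_interval hsb hi (t.1 - 1) (by omega) (by omega)
              rw [hcol] at this
              exact absurd this (by simp [htV.2.2])
            · exact heq
            · exfalso
              have : bAt f (s.1 - 1) t.2 = true :=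
                runV_interval htb hi2 (s.1 - 1) (by omega) (by omega)
              rw [← hcol] at this
              exact absurd this (by simp [hsV.2.2])
          exact Prod.ext hrow hcol
        · rw [if_neg (by simp [htD])] at hpt
          simp only [List.mem_singleton] at hpt
          subst hpt
          have htS := start_branchS hts ((Bool.not_eq_true _).mp htR) ((Bool.not_eq_true _).mp htD)
          exfalso
          rcases Bool.or_eq_true_iff.mp hpnbr with hx | hx
          · exact absurd hx (by simp [htS.2.2.2.1])
          · exact absurd hx (by simp [htS.2.2.2.2])
    · rw [if_neg (by simp [hsD])] at hps
      simp only [List.mem_singleton] at hps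
      subst hps
      have hsS := start_branchS hss ((Bool.not_eq_true _).mp hsR) ((Bool.not_eq_true _).mp hsD)
      by_cases htR : bAt f t.1 (t.2+1) = true
      · rw [if_pos htR] at hpt
        simp only [List.mem_map, List.mem_range] at hpt
        obtain ⟨i2, hi2, heqt⟩ := hpt
        exfalso
        have hpnbrH : (bAt f p.1 (p.2 - 1) || bAt f p.1 (p.2 + 1)) = true := by
          rw [← heqt]
          exact runH_nbr htb htR hi2
        rcases Bool.or_eq_true_iff.mp hpnbrH with hx | hx
        · exact absurd hx (by simp [hsS.2.1])
        · exact absurd hx (by simp [hsS.2.2.1])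
      · rw [if_neg (by simp [htR])] at hpt
        by_cases htD : bAt f (t.1+1) t.2 = true
        · rw [if_pos htD] at hpt
          simp only [List.mem_map, List.mem_range] at hpt
          obtain ⟨i2, hi2, heqt⟩ := hpt
          exfalso
          have hpnbrV : (bAt f (p.1 - 1) p.2 || bAt f (p.1 + 1) p.2) = true := by
            rw [← heqt]
            exact runV_nbr htb htD hi2
          rcases Bool.or_eq_true_iff.mp hpnbrV with hx | hx
          · exact absurd hx (by simp [hsS.2.2.2.1])
          · exact absurd hx (by simp [hsS.2.2.2.2])
        · rw [if_neg (by simp [htD])] at hpt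
          simp only [List.mem_singleton] at hpt
          exact hpt

lemma aDiagHit_eq (f : List (List Int)) (r c : Int) :
    aDiagHit f r c = (bAt f (r-1) (c-1) || (bAt f (r-1) (c+1) || (bAt f (r+1) (c-1) || bAt f (r+1) (c+1)))) := by
  simp only [aDiagHit, List.any_cons, List.any_nil, Bool.or_false]
  rw [← aShip_guard_eq, ← aShip_guard_eq, ← aShip_guard_eq, ← aShip_guard_eq]

lemma runCells_H {f : List (List Int)} {r c : Int} (hR : bAt f r (c+1) = true) :
    runCells f (r, c) = (List.range (bRunH f r c 11)).map (fun (i : Nat) => ((r : Int), c + (i:Int))) := by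
  unfold runCells
  rw [if_pos (show bAt f (r, c).1 ((r, c).2 + 1) = true from hR)]

lemma runCells_V {f : List (List Int)} {r c : Int} (hR : bAt f r (c+1) = false) (hD : bAt f (r+1) c = true) :
    runCells f (r, c) = (List.range (bRunV f c r 11)).map (fun (i : Nat) => (r + (i:Int), (c : Int))) := by
  unfold runCells
  rw [if_neg (show ¬ bAt f (r, c).1 ((r, c).2 + 1) = true from by simp [hR]),
      if_pos (show bAt f ((r, c).1 + 1) (r, c).2 = true from hD)]

lemma runCells_S {f : List (List Int)} {r c : Int} (hR : bAt f r (c+1) = false) (hD : bAt f (r+1) c = false) :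
    runCells f (r, c) = [((r : Int), (c : Int))] := by
  unfold runCells
  rw [if_neg (show ¬ bAt f (r, c).1 ((r, c).2 + 1) = true from by simp [hR]),
      if_neg (show ¬ bAt f ((r, c).1 + 1) (r, c).2 = true from by simp [hD])]

lemma vertfree_H {f : List (List Int)} (hG : Good f) {r c : Int} (hb : bAt f r c = true) (hR : bAt f r (c+1) = true) :
    ∀ i : Nat, i < bRunH f r c 11 → bAt f (r-1) (c + (i:Int)) = false ∧ bAt f (r+1) (c + (i:Int)) = false := by
  intro i hi
  have hc0 : 0 ≤ c := (bAt_bounds hb).2.2.1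
  have hcell : bAt f r (c + (i:Int)) = true := runH_ship hc0 hi
  have hnbr := runH_nbr hb hR hi
  rcases good_bend hG hcell with h1 | h1
  · rw [hnbr] at h1
    exact absurd h1 (by simp)
  · exact Bool.or_eq_false_iff.mp h1

lemma horizfree_V {f : List (List Int)} (hG : Good f) {r c : Int} (hb : bAt f r c = true) (hD : bAt f (r+1) c = true) :
    ∀ i : Nat, i < bRunV f c r 11 → bAt f (r + (i:Int)) (c-1) = false ∧ bAt f (r + (i:Int)) (c+1) = false := by
  intro i hi
  have hr0 : 0 ≤ r := (bAt_bounds hb).1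
  have hcell : bAt f (r + (i:Int)) c = true := runV_ship hr0 hi
  have hnbr := runV_nbr hb hD hi
  rcases good_bend hG hcell with h1 | h1
  · exact Bool.or_eq_false_iff.mp h1
  · rw [hnbr] at h1
    exact absurd h1 (by simp)

lemma mem_aNeighbors8_cases {r c : Int} {q : Int × Int} (h : q ∈ aNeighbors8 r c) :
    (0 ≤ q.1 ∧ q.1 < 10 ∧ 0 ≤ q.2 ∧ q.2 < 10) ∧
    (q = (r - 1, c - 1) ∨ q = (r - 1, c) ∨ q = (r - 1, c + 1) ∨ q = (r, c - 1) ∨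
     q = (r, c + 1) ∨ q = (r + 1, c - 1) ∨ q = (r + 1, c) ∨ q = (r + 1, c + 1)) := by
  obtain ⟨hb, d, hd, rfl⟩ := (mem_aNeighbors8 q).mp h
  refine ⟨hb, ?_⟩
  simp only [List.mem_cons, List.not_mem_nil, or_false] at hd
  rcases hd with rfl | rfl | rfl | rfl | rfl | rfl | rfl | rfl
  · refine Or.inl ?_
    show ((r + -1, c + -1) : Int × Int) = (r - 1, c - 1)
    rw [Prod.mk.injEq]; constructor <;> ring
  · refine Or.inr (Or.inl ?_)
    show ((r + -1, c + 0) : Int × Int) = (r - 1, c)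
    rw [Prod.mk.injEq]; constructor <;> ring
  · refine Or.inr (Or.inr (Or.inl ?_))
    show ((r + -1, c + 1) : Int × Int) = (r - 1, c + 1)
    rw [Prod.mk.injEq]; constructor <;> ring
  · refine Or.inr (Or.inr (Or.inr (Or.inl ?_)))
    show ((r + 0, c + -1) : Int × Int) = (r, c - 1)
    rw [Prod.mk.injEq]; constructor <;> ring
  · refine Or.inr (Or.inr (Or.inr (Or.inr (Or.inl ?_))))
    show ((r + 0, c + 1) : Int × Int) = (r, c + 1)
    rw [Prod.mk.injEq]; constructor <;> ring
  · refine Or.inr (Or.inr (Or.inr (Or.inr (Or.inr (Or.inl ?_)))))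
    show ((r + 1, c + -1) : Int × Int) = (r + 1, c - 1)
    rw [Prod.mk.injEq]; constructor <;> ring
  · refine Or.inr (Or.inr (Or.inr (Or.inr (Or.inr (Or.inr (Or.inl ?_))))))
    show ((r + 1, c + 0) : Int × Int) = (r + 1, c)
    rw [Prod.mk.injEq]; constructor <;> ring
  · refine Or.inr (Or.inr (Or.inr (Or.inr (Or.inr (Or.inr (Or.inr ?_))))))
    show ((r + 1, c + 1) : Int × Int) = (r + 1, c + 1)
    rfl

lemma eight_false_H {f : List (List Int)} (hG : Good f) {r c : Int} (hH : isStartH f r c) :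
    (((List.range (bRunH f r c 11)).map (fun (i : Nat) => ((r : Int), c + (i:Int)))).any
      (fun p => (aNeighbors8 p.1 p.2).any (fun q => aShip f q.1 q.2 &&
        !((List.range (bRunH f r c 11)).map (fun (i : Nat) => ((r : Int), c + (i:Int)))).contains q))) = false := by
  obtain ⟨hb, hR, hL⟩ := hH
  have hc0 : 0 ≤ c := (bAt_bounds hb).2.2.1
  have hvt := vertfree_H hG hb hR
  rw [List.any_eq_false]
  intro p hp
  rw [Bool.not_eq_true, List.any_eq_false]
  intro q hq
  intro hx
  obtain ⟨hxa, hxc⟩ := Bool.and_eq_true_iff.mp hx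
  rw [Bool.not_eq_true'] at hxc
  obtain ⟨hqb, hqc⟩ := mem_aNeighbors8_cases hq
  simp only [List.mem_map, List.mem_range] at hp
  obtain ⟨i, hi, hpeq⟩ := hp
  have hp1 : p.1 = r := by rw [← hpeq]
  have hp2 : p.2 = c + (i:Int) := by rw [← hpeq]
  have hcell : bAt f r (c + (i:Int)) = true := runH_ship hc0 hi
  have hdiag := good_diag hG hcell
  have hmemc : ∀ j : Nat, j < bRunH f r c 11 →
      (((r : Int), c + (j:Int)) : Int × Int) ∈ (List.range (bRunH f r c 11)).map (fun (i : Nat) => ((r : Int), c + (i:Int))) := by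
    intro j hj
    simp only [List.mem_map, List.mem_range]
    exact ⟨j, hj, rfl⟩
  rcases hqc with rfl | rfl | rfl | rfl | rfl | rfl | rfl | rfl <;>
    dsimp only at hxa hxc hqb <;> rw [hp1, hp2] at hxa hxc hqb
  · -- (r-1, c+i-1): up-left diagonal
    have hbq : bAt f (r - 1) (c + (i:Int) - 1) = true := by
      rw [← aShip_eq_bAt hqb.1 hqb.2.1 hqb.2.2.1 hqb.2.2.2]; exact hxa
    exact absurd hbq (by simp [hdiag.2.2.1])
  · -- (r-1, c+i): directly above
    have hbq : bAt f (r - 1) (c + (i:Int)) = true := by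
      rw [← aShip_eq_bAt hqb.1 hqb.2.1 hqb.2.2.1 hqb.2.2.2]; exact hxa
    exact absurd hbq (by simp [(hvt i hi).1])
  · -- (r-1, c+i+1): up-right diagonal
    have hbq : bAt f (r - 1) (c + (i:Int) + 1) = true := by
      rw [← aShip_eq_bAt hqb.1 hqb.2.1 hqb.2.2.1 hqb.2.2.2]; exact hxa
    exact absurd hbq (by simp [hdiag.2.2.2])
  · -- (r, c+i-1): left neighbour
    cases i with
    | zero =>
      have hbq : bAt f r (c + ((0:Nat):Int) - 1) = true := by
        rw [← aShip_eq_bAt hqb.1 hqb.2.1 hqb.2.2.1 hqb.2.2.2]; exact hxa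
      rw [show c + ((0:Nat):Int) - 1 = c - 1 from by push_cast; ring] at hbq
      exact absurd hbq (by simp [hL])
    | succ j =>
      rw [show (((r:Int), c + ((j+1:Nat):Int) - 1) : Int × Int) = ((r:Int), c + (j:Int)) from by
        rw [Prod.mk.injEq]; exact ⟨rfl, by push_cast; ring⟩] at hxc
      exact absurd (hmemc j (by omega)) (by simpa using hxc)
  · -- (r, c+i+1): right neighbour
    by_cases hend : i + 1 < bRunH f r c 11
    · rw [show (((r:Int), c + ((i:Nat):Int) + 1) : Int × Int) = ((r:Int), c + ((i+1:Nat):Int)) from by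
        rw [Prod.mk.injEq]; exact ⟨rfl, by push_cast; ring⟩] at hxc
      exact absurd (hmemc (i+1) hend) (by simpa using hxc)
    · have heq : i + 1 = bRunH f r c 11 := by omega
      have hbq : bAt f r (c + (i:Int) + 1) = true := by
        rw [← aShip_eq_bAt hqb.1 hqb.2.1 hqb.2.2.1 hqb.2.2.2]; exact hxa
      rw [show c + (i:Int) + 1 = c + ((i+1:Nat):Int) from by push_cast; ring, heq] at hbq
      exact absurd hbq (by simp [runH_end (f := f) (r := r) hc0])
  · -- (r+1, c+i-1): down-left diagonal
    have hbq : bAt f (r + 1) (c + (i:Int) - 1) = true := by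
      rw [← aShip_eq_bAt hqb.1 hqb.2.1 hqb.2.2.1 hqb.2.2.2]; exact hxa
    exact absurd hbq (by simp [hdiag.2.1])
  · -- (r+1, c+i): directly below
    have hbq : bAt f (r + 1) (c + (i:Int)) = true := by
      rw [← aShip_eq_bAt hqb.1 hqb.2.1 hqb.2.2.1 hqb.2.2.2]; exact hxa
    exact absurd hbq (by simp [(hvt i hi).2])
  · -- (r+1, c+i+1): down-right diagonal
    have hbq : bAt f (r + 1) (c + (i:Int) + 1) = true := by
      rw [← aShip_eq_bAt hqb.1 hqb.2.1 hqb.2.2.1 hqb.2.2.2]; exact hxa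
    exact absurd hbq (by simp [hdiag.1])

lemma eight_false_V {f : List (List Int)} (hG : Good f) {r c : Int} (hV : isStartV f r c) :
    (((List.range (bRunV f c r 11)).map (fun (i : Nat) => (r + (i:Int), (c : Int)))).any
      (fun p => (aNeighbors8 p.1 p.2).any (fun q => aShip f q.1 q.2 &&
        !((List.range (bRunV f c r 11)).map (fun (i : Nat) => (r + (i:Int), (c : Int)))).contains q))) = false := by
  obtain ⟨hb, hD, hU⟩ := hV
  have hr0 : 0 ≤ r := (bAt_bounds hb).1
  have hvt := horizfree_V hG hb hD
  rw [List.any_eq_false]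
  intro p hp
  rw [Bool.not_eq_true, List.any_eq_false]
  intro q hq
  intro hx
  obtain ⟨hxa, hxc⟩ := Bool.and_eq_true_iff.mp hx
  rw [Bool.not_eq_true'] at hxc
  obtain ⟨hqb, hqc⟩ := mem_aNeighbors8_cases hq
  simp only [List.mem_map, List.mem_range] at hp
  obtain ⟨i, hi, hpeq⟩ := hp
  have hp1 : p.1 = r + (i:Int) := by rw [← hpeq]
  have hp2 : p.2 = c := by rw [← hpeq]
  have hcell : bAt f (r + (i:Int)) c = true := runV_ship hr0 hi
  have hdiag := good_diag hG hcell
  have hmemc : ∀ j : Nat, j < bRunV f c r 11 →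
      ((r + (j:Int), (c : Int)) : Int × Int) ∈ (List.range (bRunV f c r 11)).map (fun (i : Nat) => (r + (i:Int), (c : Int))) := by
    intro j hj
    simp only [List.mem_map, List.mem_range]
    exact ⟨j, hj, rfl⟩
  rcases hqc with rfl | rfl | rfl | rfl | rfl | rfl | rfl | rfl <;>
    dsimp only at hxa hxc hqb <;> rw [hp1, hp2] at hxa hxc hqb
  · -- (r+i-1, c-1): up-left diagonal
    have hbq : bAt f (r + (i:Int) - 1) (c - 1) = true := by
      rw [← aShip_eq_bAt hqb.1 hqb.2.1 hqb.2.2.1 hqb.2.2.2]; exact hxa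
    exact absurd hbq (by simp [hdiag.2.2.1])
  · -- (r+i-1, c): directly above
    cases i with
    | zero =>
      have hbq : bAt f (r + ((0:Nat):Int) - 1) c = true := by
        rw [← aShip_eq_bAt hqb.1 hqb.2.1 hqb.2.2.1 hqb.2.2.2]; exact hxa
      rw [show r + ((0:Nat):Int) - 1 = r - 1 from by push_cast; ring] at hbq
      exact absurd hbq (by simp [hU])
    | succ j =>
      rw [show ((r + ((j+1:Nat):Int) - 1, (c:Int)) : Int × Int) = (r + (j:Int), (c:Int)) from by
        rw [Prod.mk.injEq]; exact ⟨by push_cast; ring, rfl⟩] at hxc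
      exact absurd (hmemc j (by omega)) (by simpa using hxc)
  · -- (r+i-1, c+1): up-right diagonal
    have hbq : bAt f (r + (i:Int) - 1) (c + 1) = true := by
      rw [← aShip_eq_bAt hqb.1 hqb.2.1 hqb.2.2.1 hqb.2.2.2]; exact hxa
    exact absurd hbq (by simp [hdiag.2.2.2])
  · -- (r+i, c-1): left neighbour
    have hbq : bAt f (r + (i:Int)) (c - 1) = true := by
      rw [← aShip_eq_bAt hqb.1 hqb.2.1 hqb.2.2.1 hqb.2.2.2]; exact hxa
    exact absurd hbq (by simp [(hvt i hi).1])
  · -- (r+i, c+1): right neighbour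
    have hbq : bAt f (r + (i:Int)) (c + 1) = true := by
      rw [← aShip_eq_bAt hqb.1 hqb.2.1 hqb.2.2.1 hqb.2.2.2]; exact hxa
    exact absurd hbq (by simp [(hvt i hi).2])
  · -- (r+i+1, c-1): down-left diagonal
    have hbq : bAt f (r + (i:Int) + 1) (c - 1) = true := by
      rw [← aShip_eq_bAt hqb.1 hqb.2.1 hqb.2.2.1 hqb.2.2.2]; exact hxa
    exact absurd hbq (by simp [hdiag.2.1])
  · -- (r+i+1, c): directly below
    by_cases hend : i + 1 < bRunV f c r 11
    · rw [show ((r + ((i:Nat):Int) + 1, (c:Int)) : Int × Int) = (r + ((i+1:Nat):Int), (c:Int)) from by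
        rw [Prod.mk.injEq]; exact ⟨by push_cast; ring, rfl⟩] at hxc
      exact absurd (hmemc (i+1) hend) (by simpa using hxc)
    · have heq : i + 1 = bRunV f c r 11 := by omega
      have hbq : bAt f (r + (i:Int) + 1) c = true := by
        rw [← aShip_eq_bAt hqb.1 hqb.2.1 hqb.2.2.1 hqb.2.2.2]; exact hxa
      rw [show r + (i:Int) + 1 = r + ((i+1:Nat):Int) from by push_cast; ring, heq] at hbq
      exact absurd hbq (by simp [runV_end (f := f) (c := c) hr0])
  · -- (r+i+1, c+1): down-right diagonal
    have hbq : bAt f (r + (i:Int) + 1) (c + 1) = true := by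
      rw [← aShip_eq_bAt hqb.1 hqb.2.1 hqb.2.2.1 hqb.2.2.2]; exact hxa
    exact absurd hbq (by simp [hdiag.1])

lemma eight_false_S {f : List (List Int)} (hG : Good f) {r c : Int} (hS : isSingle f r c) :
    ((([((r : Int), (c : Int))] : List (Int × Int))).any
      (fun p => (aNeighbors8 p.1 p.2).any (fun q => aShip f q.1 q.2 &&
        !(([((r : Int), (c : Int))] : List (Int × Int))).contains q))) = false := by
  obtain ⟨hb, hL, hR, hU, hD⟩ := hS
  have hdiag := good_diag hG hb
  rw [List.any_eq_false]
  intro p hp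
  rw [Bool.not_eq_true, List.any_eq_false]
  intro q hq
  intro hx
  obtain ⟨hxa, _⟩ := Bool.and_eq_true_iff.mp hx
  simp only [List.mem_singleton] at hp
  obtain ⟨hqb, hqc⟩ := mem_aNeighbors8_cases hq
  have hp1 : p.1 = r := by rw [hp]
  have hp2 : p.2 = c := by rw [hp]
  rcases hqc with rfl | rfl | rfl | rfl | rfl | rfl | rfl | rfl <;>
    dsimp only at hxa hqb <;> rw [hp1, hp2] at hxa hqb
  · exact absurd (by rw [← aShip_eq_bAt hqb.1 hqb.2.1 hqb.2.2.1 hqb.2.2.2]; exact hxa :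
      bAt f (r - 1) (c - 1) = true) (by simp [hdiag.2.2.1])
  · exact absurd (by rw [← aShip_eq_bAt hqb.1 hqb.2.1 hqb.2.2.1 hqb.2.2.2]; exact hxa :
      bAt f (r - 1) c = true) (by simp [hU])
  · exact absurd (by rw [← aShip_eq_bAt hqb.1 hqb.2.1 hqb.2.2.1 hqb.2.2.2]; exact hxa :
      bAt f (r - 1) (c + 1) = true) (by simp [hdiag.2.2.2])
  · exact absurd (by rw [← aShip_eq_bAt hqb.1 hqb.2.1 hqb.2.2.1 hqb.2.2.2]; exact hxa :
      bAt f r (c - 1) = true) (by simp [hL])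
  · exact absurd (by rw [← aShip_eq_bAt hqb.1 hqb.2.1 hqb.2.2.1 hqb.2.2.2]; exact hxa :
      bAt f r (c + 1) = true) (by simp [hR])
  · exact absurd (by rw [← aShip_eq_bAt hqb.1 hqb.2.1 hqb.2.2.1 hqb.2.2.2]; exact hxa :
      bAt f (r + 1) (c - 1) = true) (by simp [hdiag.2.1])
  · exact absurd (by rw [← aShip_eq_bAt hqb.1 hqb.2.1 hqb.2.2.1 hqb.2.2.2]; exact hxa :
      bAt f (r + 1) c = true) (by simp [hD])
  · exact absurd (by rw [← aShip_eq_bAt hqb.1 hqb.2.1 hqb.2.2.1 hqb.2.2.2]; exact hxa :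
      bAt f (r + 1) (c + 1) = true) (by simp [hdiag.1])

-- on a Good field the two scans produce the same sizes, in the same order
lemma scan_agree {f : List (List Int)} (hG : Good f) : ∀ (cs done v : List (Int × Int)) (s sb : List Int),
    cellsL = done ++ cs →
    (∀ q : Int × Int, q ∈ v ↔ ∃ s0, s0 ∈ done ∧ isStart f s0 ∧ q ∈ runCells f s0) →
    ∃ t : List Int, (∃ v2, aScan f cs v s = some (v2, s ++ t)) ∧ bScan f cs sb = some (sb ++ t) := by
  intro cs
  induction cs with
  | nil =>
    intro done v s sb hdec hinv
    exact ⟨[], ⟨v, by simp [aScan]⟩, by simp [bScan]⟩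
  | cons hd0 rest ih =>
    obtain ⟨r, c⟩ := hd0
    intro done v s sb hdec hinv
    have hmem : ((r, c) : Int × Int) ∈ cellsL := by rw [hdec]; simp
    obtain ⟨hr0, hr1, hc0, hc1⟩ := (mem_cellsL _).mp hmem
    have hdec' : cellsL = (done ++ [((r, c) : Int × Int)]) ++ rest := by rw [hdec]; simp
    have hnotdone : ((r, c) : Int × Int) ∉ done := by
      intro hin
      have hnd := cellsL_nodup
      rw [hdec] at hnd
      exact (List.disjoint_of_nodup_append hnd) hin (by simp)
    by_cases hb : bAt f r c = true
    · by_cases hvis : ((r, c) : Int × Int) ∈ v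
      · -- already visited: A skips via the visited matrix, B skips since it is not a run start
        obtain ⟨s0, hs0done, hs0start, hs0run⟩ := (hinv _).mp hvis
        have hs0ne : ((r, c) : Int × Int) ≠ s0 := by
          rintro rfl
          exact hnotdone hs0done
        have hlu := run_interior (isStart_bAt hs0start) hs0run hs0ne
        have hcond := nonstart_conds hG hb hlu
        have hinv' : ∀ q : Int × Int, q ∈ v ↔ ∃ s0, s0 ∈ done ++ [((r, c) : Int × Int)] ∧ isStart f s0 ∧ q ∈ runCells f s0 := by
          intro q
          rw [hinv q]
          constructor
          · rintro ⟨s1, h1, h2, h3⟩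
            exact ⟨s1, by simp [h1], h2, h3⟩
          · rintro ⟨s1, h1, h2, h3⟩
            rcases List.mem_append.mp h1 with h1 | h1
            · exact ⟨s1, h1, h2, h3⟩
            · simp only [List.mem_singleton] at h1
              subst h1
              exact absurd h2 hcond.2.2.2
        obtain ⟨t, ⟨v2, hA⟩, hB⟩ := ih (done ++ [(r, c)]) v s sb hdec' hinv'
        refine ⟨t, ⟨v2, ?_⟩, ?_⟩
        · rw [aScan_cons, if_pos (by simp; exact Or.inr hvis)]
          exact hA
        · have hok := hG r c hb
          rw [bScan_cons, if_neg (by simp [hb]),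
              if_neg (by simp [hok.1, hok.2.1]), if_neg (by simp [hok.2.2]),
              if_neg (by simp [hcond.1]), if_neg (by simp [hcond.2.1]),
              if_neg (by simp [hcond.2.2.1])]
          exact hB
      · -- fresh ship cell: it must be a run start; A walks the whole run, B emits its length
        obtain ⟨s0, hstart0, hrun0, horder⟩ := exists_start hG hb
        have hs0eq : s0 = ((r, c) : Int × Int) := by
          have hs0b := isStart_bAt hstart0
          have hsb := bAt_bounds hs0b
          have hs0mem : s0 ∈ cellsL := (mem_cellsL _).mpr ⟨hsb.1, hsb.2.1, hsb.2.2.1, hsb.2.2.2.1⟩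
          rw [hdec] at hs0mem
          rcases List.mem_append.mp hs0mem with hin | hin
          · exact absurd ((hinv _).mpr ⟨s0, hin, hstart0, hrun0⟩) hvis
          · rcases List.mem_cons.mp hin with h | h
            · exact h
            · exfalso
              have hpw := cellsL_pairwise
              rw [hdec] at hpw
              have hcons := (List.pairwise_append.mp hpw).2.1
              have hrel := (List.pairwise_cons.mp hcons).1 s0 h
              simp only at hrel
              rcases horder with h1 | ⟨h1, h2⟩ <;> rcases hrel with h3 | ⟨h3, h4⟩ <;> omega
        subst hs0eq
        -- A's first three tests pass
        have hcontF : v.contains ((r, c) : Int × Int) = false := by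
          by_contra hx
          rw [Bool.not_eq_false] at hx
          exact hvis (List.mem_of_elem_eq_true hx)
        have hshipT : aShip f r c = true := by
          rw [aShip_eq_bAt hr0 hr1 hc0 hc1]; exact hb
        have hdiagF : aDiagHit f r c = false := by
          have hd := good_diag hG hb
          rw [aDiagHit_eq, hd.2.2.1, hd.2.2.2, hd.2.1, hd.1]
          rfl
        have hRexpr : (decide (c + 1 < 10) && aShip f r (c+1)) = bAt f r (c+1) := cond_colhigh hr0 hr1 (by omega)
        have hDexpr : (decide (r + 1 < 10) && aShip f (r+1) c) = bAt f (r+1) c := cond_rowhigh (by omega) hc0 hc1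
        rcases hstart0 with hSH0 | hSV0 | hSS0
        · -- horizontal run
          have hSH : isStartH f r c := hSH0
          have hR : bAt f r (c+1) = true := hSH.2.1
          have hD : bAt f (r+1) c = false := by
            rcases good_bend hG hb with h1 | h1
            · exact absurd hR (by simp [(Bool.or_eq_false_iff.mp h1).2])
            · exact (Bool.or_eq_false_iff.mp h1).2
          have hvt := vertfree_H hG hb hR
          have hrunEq : runCells f ((r, c) : Int × Int) =
              (List.range (bRunH f r c 11)).map (fun (i : Nat) => ((r : Int), c + (i:Int))) := runCells_H hR
          have hnodupc : ((List.range (bRunH f r c 11)).map (fun (i : Nat) => ((r : Int), c + (i:Int)))).Nodup := by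
            refine List.Nodup.map ?_ (List.nodup_range)
            intro a b hab
            rw [Prod.mk.injEq] at hab
            omega
          have hdisj : ∀ q ∈ (List.range (bRunH f r c 11)).map (fun (i : Nat) => ((r : Int), c + (i:Int))), q ∉ v := by
            intro q hq hqv
            obtain ⟨s1, h1, h2, h3⟩ := (hinv q).mp hqv
            have : s1 = ((r, c) : Int × Int) :=
              runs_disjoint hG h2 (Or.inl hSH) h3 (by rw [hrunEq]; exact hq)
            subst this
            exact hnotdone h1
          have h8 := eight_false_H hG hSH
          have hinv' : ∀ q : Int × Int,
              q ∈ v ++ (List.range (bRunH f r c 11)).map (fun (i : Nat) => ((r : Int), c + (i:Int))) ↔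
              ∃ s0, s0 ∈ done ++ [((r, c) : Int × Int)] ∧ isStart f s0 ∧ q ∈ runCells f s0 := by
            intro q
            rw [List.mem_append, hinv q]
            constructor
            · rintro (⟨s1, h1, h2, h3⟩ | hcl)
              · exact ⟨s1, by simp [h1], h2, h3⟩
              · exact ⟨(r, c), by simp, Or.inl hSH, by rw [hrunEq]; exact hcl⟩
            · rintro ⟨s1, h1, h2, h3⟩
              rcases List.mem_append.mp h1 with h1 | h1
              · exact Or.inl ⟨s1, h1, h2, h3⟩
              · simp only [List.mem_singleton] at h1
                subst h1
                right
                rw [← hrunEq]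
                exact h3
          obtain ⟨t, ⟨v2, hA⟩, hB⟩ := ih (done ++ [(r, c)])
            (v ++ (List.range (bRunH f r c 11)).map (fun (i : Nat) => ((r : Int), c + (i:Int))))
            (s ++ [(bRunH f r c 11 : Int)]) (sb ++ [(bRunH f r c 11 : Int)]) hdec' hinv'
          refine ⟨(bRunH f r c 11 : Int) :: t, ⟨v2, ?_⟩, ?_⟩
          · rw [aScan_cons, if_neg (by simp [hshipT]; exact hvis), if_neg (by simp [hdiagF]),
                if_neg (by rw [hRexpr, hDexpr]; simp [hD]), if_pos (by rw [hRexpr]; exact hR),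
                aWalkH_run hr0 hr1 11 c hc0 (by omega) hvt, Option.bind_some,
                aMark_some_of _ _ hnodupc hdisj, Option.bind_some, if_neg (by rw [h8]; simp)]
            rw [show ((((List.range (bRunH f r c 11)).map (fun (i : Nat) => ((r : Int), c + (i:Int)))).length : Int)) = (bRunH f r c 11 : Int) from by simp]
            rw [hA]
            simp
          · rw [bScan_cons, if_neg (by simp [hb]),
                if_neg (by simp [(hG r c hb).1, (hG r c hb).2.1]), if_neg (by simp [(hG r c hb).2.2]),
                if_pos (by simp [hR, hSH.2.2]), hB]
            simp
        · -- vertical run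
          have hSV : isStartV f r c := hSV0
          have hD : bAt f (r+1) c = true := hSV.2.1
          have hR : bAt f r (c+1) = false := by
            rcases good_bend hG hb with h1 | h1
            · exact (Bool.or_eq_false_iff.mp h1).2
            · exact absurd hD (by simp [(Bool.or_eq_false_iff.mp h1).2])
          have hvt := horizfree_V hG hb hD
          have hrunEq : runCells f ((r, c) : Int × Int) =
              (List.range (bRunV f c r 11)).map (fun (i : Nat) => (r + (i:Int), (c : Int))) := runCells_V hR hD
          have hnodupc : ((List.range (bRunV f c r 11)).map (fun (i : Nat) => (r + (i:Int), (c : Int)))).Nodup := by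
            refine List.Nodup.map ?_ (List.nodup_range)
            intro a b hab
            rw [Prod.mk.injEq] at hab
            omega
          have hdisj : ∀ q ∈ (List.range (bRunV f c r 11)).map (fun (i : Nat) => (r + (i:Int), (c : Int))), q ∉ v := by
            intro q hq hqv
            obtain ⟨s1, h1, h2, h3⟩ := (hinv q).mp hqv
            have : s1 = ((r, c) : Int × Int) :=
              runs_disjoint hG h2 (Or.inr (Or.inl hSV)) h3 (by rw [hrunEq]; exact hq)
            subst this
            exact hnotdone h1
          have h8 := eight_false_V hG hSV
          have hinv' : ∀ q : Int × Int,
              q ∈ v ++ (List.range (bRunV f c r 11)).map (fun (i : Nat) => (r + (i:Int), (c : Int))) ↔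
              ∃ s0, s0 ∈ done ++ [((r, c) : Int × Int)] ∧ isStart f s0 ∧ q ∈ runCells f s0 := by
            intro q
            rw [List.mem_append, hinv q]
            constructor
            · rintro (⟨s1, h1, h2, h3⟩ | hcl)
              · exact ⟨s1, by simp [h1], h2, h3⟩
              · exact ⟨(r, c), by simp, Or.inr (Or.inl hSV), by rw [hrunEq]; exact hcl⟩
            · rintro ⟨s1, h1, h2, h3⟩
              rcases List.mem_append.mp h1 with h1 | h1
              · exact Or.inl ⟨s1, h1, h2, h3⟩
              · simp only [List.mem_singleton] at h1
                subst h1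
                right
                rw [← hrunEq]
                exact h3
          obtain ⟨t, ⟨v2, hA⟩, hB⟩ := ih (done ++ [(r, c)])
            (v ++ (List.range (bRunV f c r 11)).map (fun (i : Nat) => (r + (i:Int), (c : Int))))
            (s ++ [(bRunV f c r 11 : Int)]) (sb ++ [(bRunV f c r 11 : Int)]) hdec' hinv'
          refine ⟨(bRunV f c r 11 : Int) :: t, ⟨v2, ?_⟩, ?_⟩
          · rw [aScan_cons, if_neg (by simp [hshipT]; exact hvis), if_neg (by simp [hdiagF]),
                if_neg (by rw [hRexpr, hDexpr]; simp [hR]), if_neg (by rw [hRexpr]; simp [hR]),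
                if_pos (by rw [hDexpr]; exact hD),
                aWalkV_run hc0 hc1 11 r hr0 (by omega) hvt, Option.bind_some,
                aMark_some_of _ _ hnodupc hdisj, Option.bind_some, if_neg (by rw [h8]; simp)]
            rw [show ((((List.range (bRunV f c r 11)).map (fun (i : Nat) => (r + (i:Int), (c : Int)))).length : Int)) = (bRunV f c r 11 : Int) from by simp]
            rw [hA]
            simp
          · rw [bScan_cons, if_neg (by simp [hb]),
                if_neg (by simp [(hG r c hb).1, (hG r c hb).2.1]), if_neg (by simp [(hG r c hb).2.2]),
                if_neg (by simp [hR]), if_pos (by simp [hD, hSV.2.2]), hB]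
            simp
        · -- single-cell ship
          have hSS : isSingle f r c := hSS0
          have hR : bAt f r (c+1) = false := hSS.2.2.1
          have hD : bAt f (r+1) c = false := hSS.2.2.2.2
          have hrunEq : runCells f ((r, c) : Int × Int) = [((r : Int), (c : Int))] := runCells_S hR hD
          have h8 := eight_false_S hG hSS
          have hinv' : ∀ q : Int × Int,
              q ∈ v ++ [((r, c) : Int × Int)] ↔
              ∃ s0, s0 ∈ done ++ [((r, c) : Int × Int)] ∧ isStart f s0 ∧ q ∈ runCells f s0 := by
            intro q
            rw [List.mem_append, hinv q]
            constructor
            · rintro (⟨s1, h1, h2, h3⟩ | hcl)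
              · exact ⟨s1, by simp [h1], h2, h3⟩
              · exact ⟨(r, c), by simp, Or.inr (Or.inr hSS), by rw [hrunEq]; exact hcl⟩
            · rintro ⟨s1, h1, h2, h3⟩
              rcases List.mem_append.mp h1 with h1 | h1
              · exact Or.inl ⟨s1, h1, h2, h3⟩
              · simp only [List.mem_singleton] at h1
                subst h1
                right
                rw [← hrunEq]
                exact h3
          obtain ⟨t, ⟨v2, hA⟩, hB⟩ := ih (done ++ [(r, c)]) (v ++ [((r, c) : Int × Int)])
            (s ++ [(1 : Int)]) (sb ++ [(1 : Int)]) hdec' hinv'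
          refine ⟨(1 : Int) :: t, ⟨v2, ?_⟩, ?_⟩
          · rw [aScan_cons, if_neg (by simp [hshipT]; exact hvis), if_neg (by simp [hdiagF]),
                if_neg (by rw [hRexpr, hDexpr]; simp [hR]), if_neg (by rw [hRexpr]; simp [hR]),
                if_neg (by rw [hDexpr]; simp [hD]), Option.bind_some,
                aMark_some_of _ _ (by simp) (by simpa using hvis), Option.bind_some,
                if_neg (by rw [h8]; simp)]
            rw [show (([((r : Int), (c : Int))] : List (Int × Int)).length : Int) = (1 : Int) from by simp]
            rw [hA]
            simp
          · rw [bScan_cons, if_neg (by simp [hb]),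
                if_neg (by simp [(hG r c hb).1, (hG r c hb).2.1]), if_neg (by simp [(hG r c hb).2.2]),
                if_neg (by simp [hR]), if_neg (by simp [hD]),
                if_pos (by simp [hSS.2.1, hR, hSS.2.2.2.1, hD]), hB]
            simp
    · -- not a ship cell: both scans skip it
      have hsh : aShip f r c = false := by
        rw [aShip_eq_bAt hr0 hr1 hc0 hc1]
        exact (Bool.not_eq_true _).mp hb
      have hinv' : ∀ q : Int × Int, q ∈ v ↔ ∃ s0, s0 ∈ done ++ [((r, c) : Int × Int)] ∧ isStart f s0 ∧ q ∈ runCells f s0 := by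
        intro q
        rw [hinv q]
        constructor
        · rintro ⟨s1, h1, h2, h3⟩
          exact ⟨s1, by simp [h1], h2, h3⟩
        · rintro ⟨s1, h1, h2, h3⟩
          rcases List.mem_append.mp h1 with h1 | h1
          · exact ⟨s1, h1, h2, h3⟩
          · simp only [List.mem_singleton] at h1
            subst h1
            exact absurd (isStart_bAt h2) (by simp [hb])
      obtain ⟨t, ⟨v2, hA⟩, hB⟩ := ih (done ++ [(r, c)]) v s sb hdec' hinv'
      refine ⟨t, ⟨v2, ?_⟩, ?_⟩
      · rw [aScan_cons, if_pos (by simp [hsh])]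
        exact hA
      · rw [bScan_cons, if_pos (by simp [(Bool.not_eq_true _).mp hb])]
        exact hB

-- the counts dict with its four fixed keys
def mkC (a b c d : Int) : PySem.Dict Int Int :=
  ((((PySem.Dict.empty).insert 1 a).insert 2 b).insert 3 c).insert 4 d

lemma aCounts_char : ∀ (ss : List Int) (a b c d : Int), aCounts (mkC a b c d) ss =
    (if ss.all (fun x => x == 1 || x == 2 || x == 3 || x == 4)
     then some (mkC (a + (ss.count 1 : Int)) (b + (ss.count 2 : Int)) (c + (ss.count 3 : Int)) (d + (ss.count 4 : Int)))
     else none) := by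
  intro ss
  induction ss with
  | nil => intro a b c d; simp [aCounts]
  | cons x ssr ih =>
    intro a b c d
    by_cases h1 : x = (1 : Int)
    · subst h1
      rw [show aCounts (mkC a b c d) ((1:Int) :: ssr) = aCounts (mkC (a+1) b c d) ssr from rfl, ih]
      by_cases hall : ssr.all (fun x => x == 1 || x == 2 || x == 3 || x == 4) = true
      · rw [if_pos hall, if_pos (by simp [hall])]
        rw [show ((1:Int) :: ssr).count 1 = ssr.count 1 + 1 from by simp,
            show ((1:Int) :: ssr).count 2 = ssr.count 2 from by simp,
            show ((1:Int) :: ssr).count 3 = ssr.count 3 from by simp,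
            show ((1:Int) :: ssr).count 4 = ssr.count 4 from by simp,
            show a + 1 + (ssr.count 1 : Int) = a + ((ssr.count 1 + 1 : Nat) : Int) from by push_cast; ring]
      · rw [if_neg hall, if_neg (by simp [hall])]
    · by_cases h2 : x = (2 : Int)
      · subst h2
        rw [show aCounts (mkC a b c d) ((2:Int) :: ssr) = aCounts (mkC a (b+1) c d) ssr from rfl, ih]
        by_cases hall : ssr.all (fun x => x == 1 || x == 2 || x == 3 || x == 4) = true
        · rw [if_pos hall, if_pos (by simp [hall])]
          rw [show ((2:Int) :: ssr).count 1 = ssr.count 1 from by simp,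
              show ((2:Int) :: ssr).count 2 = ssr.count 2 + 1 from by simp,
              show ((2:Int) :: ssr).count 3 = ssr.count 3 from by simp,
              show ((2:Int) :: ssr).count 4 = ssr.count 4 from by simp,
              show b + 1 + (ssr.count 2 : Int) = b + ((ssr.count 2 + 1 : Nat) : Int) from by push_cast; ring]
        · rw [if_neg hall, if_neg (by simp [hall])]
      · by_cases h3 : x = (3 : Int)
        · subst h3
          rw [show aCounts (mkC a b c d) ((3:Int) :: ssr) = aCounts (mkC a b (c+1) d) ssr from rfl, ih]
          by_cases hall : ssr.all (fun x => x == 1 || x == 2 || x == 3 || x == 4) = true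
          · rw [if_pos hall, if_pos (by simp [hall])]
            rw [show ((3:Int) :: ssr).count 1 = ssr.count 1 from by simp,
                show ((3:Int) :: ssr).count 2 = ssr.count 2 from by simp,
                show ((3:Int) :: ssr).count 3 = ssr.count 3 + 1 from by simp,
                show ((3:Int) :: ssr).count 4 = ssr.count 4 from by simp,
                show c + 1 + (ssr.count 3 : Int) = c + ((ssr.count 3 + 1 : Nat) : Int) from by push_cast; ring]
          · rw [if_neg hall, if_neg (by simp [hall])]
        · by_cases h4 : x = (4 : Int)
          · subst h4
            rw [show aCounts (mkC a b c d) ((4:Int) :: ssr) = aCounts (mkC a b c (d+1)) ssr from rfl, ih]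
            by_cases hall : ssr.all (fun x => x == 1 || x == 2 || x == 3 || x == 4) = true
            · rw [if_pos hall, if_pos (by simp [hall])]
              rw [show ((4:Int) :: ssr).count 1 = ssr.count 1 from by simp,
                  show ((4:Int) :: ssr).count 2 = ssr.count 2 from by simp,
                  show ((4:Int) :: ssr).count 3 = ssr.count 3 from by simp,
                  show ((4:Int) :: ssr).count 4 = ssr.count 4 + 1 from by simp,
                  show d + 1 + (ssr.count 4 : Int) = d + ((ssr.count 4 + 1 : Nat) : Int) from by push_cast; ring]
            · rw [if_neg hall, if_neg (by simp [hall])]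
          · have hget : (mkC a b c d).get? x = none := by
              rw [show mkC a b c d = PySem.Dict.mk [((1:Int),a),(2,b),(3,c),(4,d)] from rfl]
              rw [PySem.Dict.get?_mk_cons, if_neg (by simp; omega)]
              rw [PySem.Dict.get?_mk_cons, if_neg (by simp; omega)]
              rw [PySem.Dict.get?_mk_cons, if_neg (by simp; omega)]
              rw [PySem.Dict.get?_mk_cons, if_neg (by simp; omega)]
              rfl
            have hstep : aCounts (mkC a b c d) (x :: ssr) = none := by
              show (match (mkC a b c d).get? x with
                | none => none
                | some k => aCounts ((mkC a b c d).insert x (k+1)) ssr) = none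
              rw [hget]
            rw [hstep, if_neg (by simp; intro h; omega)]
  termination_by ss => ss.length

lemma counts_eq_countP (l : List Int) :
    l.count 1 + l.count 2 + l.count 3 + l.count 4 = l.countP (fun x => x == 1 || x == 2 || x == 3 || x == 4) := by
  induction l with
  | nil => rfl
  | cons x t ih =>
    simp only [List.count_cons, List.countP_cons]
    by_cases h1 : x = (1:Int)
    · subst h1; simp; omega
    · by_cases h2 : x = (2:Int)
      · subst h2; simp; omega
      · by_cases h3 : x = (3:Int)
        · subst h3; simp; omega
        · by_cases h4 : x = (4:Int)
          · subst h4; simp; omega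
          · simp [h1, h2, h3, h4, Ne.symm h1, Ne.symm h2, Ne.symm h3, Ne.symm h4]
            omega

lemma count_all_iff (l : List Int) :
    (l.all (fun x => x == 1 || x == 2 || x == 3 || x == 4) = true) ↔
    l.count 1 + l.count 2 + l.count 3 + l.count 4 = l.length := by
  rw [counts_eq_countP, List.all_eq_true]
  constructor
  · intro h
    exact List.countP_eq_length.mpr h
  · intro h
    exact List.countP_eq_length.mp h

lemma final_eq (ships : List Int) :
    (match aCounts (mkC 0 0 0 0) ships with
     | none => false
     | some counts => aDictEq counts (((((PySem.Dict.empty).insert 4 1).insert 3 2).insert 2 3).insert 1 4)) =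
    (ships.length == 10 && ships.count 1 == 4 && ships.count 2 == 3 && ships.count 3 == 2 && ships.count 4 == 1) := by
  have hiff : ∀ {a b : Bool}, (a = true ↔ b = true) → a = b := by
    intro a b h
    cases a <;> cases b <;> simp_all
  rw [aCounts_char]
  by_cases hall : ships.all (fun x => x == 1 || x == 2 || x == 3 || x == 4) = true
  · rw [if_pos hall]
    show ((4 == ((0:Int) + (ships.count 1 : Int))) &&
          ((3 == ((0:Int) + (ships.count 2 : Int))) &&
           ((2 == ((0:Int) + (ships.count 3 : Int))) &&
            ((1 == ((0:Int) + (ships.count 4 : Int))) && true)))) = _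
    apply hiff
    simp only [Bool.and_eq_true, beq_iff_eq, and_true]
    have hlen := (count_all_iff ships).mp hall
    constructor
    · rintro ⟨e1, e2, e3, e4⟩
      refine ⟨⟨⟨⟨by omega, by omega⟩, by omega⟩, by omega⟩, by omega⟩
    · rintro ⟨⟨⟨⟨h0, hc1⟩, hc2⟩, hc3⟩, hc4⟩
      refine ⟨by omega, by omega, by omega, by omega⟩
  · rw [if_neg hall]
    show false = _
    symm
    apply hiff
    constructor
    · intro h
      exfalso
      simp only [Bool.and_eq_true, beq_iff_eq] at h
      obtain ⟨⟨⟨⟨hlen, hc1⟩, hc2⟩, hc3⟩, hc4⟩ := h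
      apply hall
      rw [count_all_iff]
      omega
    · intro h
      exact absurd h (by simp)

-- ===== VERDICT (by name: the statement is the Claim_ definition above) =====
theorem validate_battlefield_spec : Claim_equal_validate_battlefield := by
  unfold Claim_equal_validate_battlefield
  intro field _
  unfold Spec_validate_battlefield
  show validate_battlefield field = validate_battlefield_alt field
  unfold validate_battlefield validate_battlefield_alt
  by_cases hg1 : (field.length != 10 || field.any (fun row => row.length != 10)) = true
  · rw [if_pos hg1, if_pos hg1]
  · rw [if_neg hg1, if_neg hg1]
    by_cases hg2 : (field.any (fun row => row.any (fun v => !(v == 0 || v == 1)))) = true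
    · rw [if_pos hg2, if_pos hg2]
    · rw [if_neg hg2, if_neg hg2]
      rw [show ((PySem.List.pyRange 0 10 1).flatMap (fun r => (PySem.List.pyRange 0 10 1).map (fun c => (r, c)))) = cellsL from rfl]
      by_cases hG : Good field
      · obtain ⟨t, ⟨v2, hA⟩, hB⟩ := scan_agree hG cellsL [] [] [] [] (by simp) (by simp)
        simp only [List.nil_append] at hA hB
        rw [hA, hB]
        exact final_eq t
      · rw [Good] at hG
        push Not at hG
        obtain ⟨r, c, hb, hnot⟩ := hG
        have hbb := bAt_bounds hb
        have hmem : ((r, c) : Int × Int) ∈ cellsL := (mem_cellsL _).mpr ⟨hbb.1, hbb.2.1, hbb.2.2.1, hbb.2.2.2.1⟩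
        have hBnone : bScan field cellsL [] = none := bScan_none cellsL [] ⟨(r, c), hmem, hb, hnot⟩
        have hAnone : aScan field cellsL [] [] = none := by
          rcases hres : aScan field cellsL [] [] with _ | res
          · rfl
          · obtain ⟨v', s'⟩ := res
            obtain ⟨_, hall, hok⟩ := aScan_sound cellsL (fun p hp => (mem_cellsL p).mp hp) [] [] v' s' hres
            have hvmem := hall (r, c) hmem hb
            rcases hok _ hvmem with hin | hcok
            · simp at hin
            · exact absurd hcok hnot
        rw [hAnone, hBnone]
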